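-- pv_equiv track=rewrite | github.com/cualestunombre/Algorithm | 완전탐색/프로그래머스(현대모비스) 상담원 인원.py | solution
-- ===== SOURCE A (Python) =====
-- import heapq
-- from itertools import permutations
--
-- def partition(n, k, l):
--     def partition_helper(n, k, l, current_partition):
--         if k == 1:
--             if n >= current_partition[-1]:
--                 current_partition.append(n)
--                 l.append(current_partition)
--             return
--         for i in range(1, n):
--             if i >= current_partition[-1]:
--                 partition_helper(n - i, k - 1, l, current_partition + [i])
--     if n < k:
--         return
--     partition_helper(n, k, l, [0])
--
-- def simulate(k, n, regs, l):
--     wait = 0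
--
--     heaps = [[] for _ in range(k + 1)]
--     cands = [[] for _ in range(k + 1)]
--     count = [0 for _ in range(k + 1)]
--     regs.sort(key=lambda x: (x[2], x[0]))
--
--     for a, b, c in regs:
--         if l[c - 1] != len(heaps[c]):
--             heapq.heappush(heaps[c], a + b)
--         else:
--             cands[c].append((a, b))
--         count[c] += 1
--
--     for i in range(1, len(heaps)):
--         if not heaps[i] and count[i] != 0:
--             return 10**18  # 대략적인 무한대 값으로 설정
--
--     for i in cands:
--         i.sort(reverse=True)
--
--     for i in range(1, k + 1):
--         while heaps[i]:
--             endTime = heapq.heappop(heaps[i])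
--             if not cands[i]:
--                 break
--             elif cands[i][-1][0] < endTime:
--                 wait += endTime - cands[i][-1][0]
--                 heapq.heappush(heaps[i], endTime + cands[i][-1][1])
--                 cands[i].pop()
--             else:
--                 heapq.heappush(heaps[i], cands[i][-1][0] + cands[i][-1][1])
--                 cands[i].pop()
--
--     return wait
--
-- def solution(k, n, reqs):
--     minValue = 100000000000000000
--     ret = []
--     l = set()
--     partition(n,k,ret)
--
--     for i in ret:
--         temp = list(permutations(i))
--         for j in temp:
--             l.add(tuple(j))
--
--     for i in l:
--         value = simulate(k,n,reqs,i)
--         if value < minValue: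
--             minValue = value
--
--     return minValue
-- ===== SOURCE B (Python) =====
-- def solution(k, n, reqs):
--     BIG = 100000000000000000
--
--     # Least total waiting time when m counselors serve this type's requests,
--     # taken in order of start time.
--     def cost(rs, m):
--         busy = [s + d for (s, d) in rs[:m]]
--         wait = 0
--         for (s, d) in sorted(rs[m:]):
--             e = min(busy)
--             i = busy.index(e)
--             if s < e:
--                 wait += e - s
--                 busy[i] = e + d
--             else:
--                 busy[i] = s + d
--         return wait
--
--     if n < k:
--         return BIG  # each type needs at least one counselor
--
--     # Only the types that actually have requests matter; a type with L requests
--     # never benefits from more than L counselors (its waiting is already 0).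
--     types = sorted({row[2] for row in reqs if 1 <= row[2] <= k})
--     caps = [len([row for row in reqs if row[2] == t]) - 1 for t in types]
--     B0 = min(n - k, sum(caps))
--
--     # Knapsack over the requested types, on top of one counselor each:
--     # F[b] = least total wait after giving the types handled so far exactly b
--     #        extra counselors (each within its cap); None = impossible.
--     # G[b] = same, but some handled type is saturated (it can absorb any
--     #        number of leftover counselors without changing its waiting).
--     F = [0] + [None] * B0
--     G = [None] * (B0 + 1)
--     for t in types:
--         rs = sorted(((row[0], row[1]) for row in reqs if row[2] == t),
--                     key=lambda p: p[0])
--         cap = len(rs) - 1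
--         W = [cost(rs, m) for m in range(1, len(rs) + 1)]
--         F2 = [None] * (B0 + 1)
--         G2 = [None] * (B0 + 1)
--         for b in range(B0 + 1):
--             bestF = None
--             bestG = None
--             for e in range(0, min(b, cap) + 1):
--                 if F[b - e] is not None and (bestF is None or F[b - e] + W[e] < bestF):
--                     bestF = F[b - e] + W[e]
--                 if G[b - e] is not None and (bestG is None or G[b - e] + W[e] < bestG):
--                     bestG = G[b - e] + W[e]
--             if b >= cap and F[b - cap] is not None and \
--                     (bestG is None or F[b - cap] + W[cap] < bestG):
--                 bestG = F[b - cap] + W[cap]  # this type becomes the saturated one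
--             F2[b] = bestF
--             G2[b] = bestG
--         F, G = F2, G2
--
--     best = BIG
--     if n - k <= B0 and F[n - k] is not None and F[n - k] < best:
--         best = F[n - k]  # the extras fit exactly
--     if len(types) < k:  # a request-free type absorbs any leftover for free
--         for b in range(B0 + 1):
--             if F[b] is not None and F[b] < best:
--                 best = F[b]
--     for b in range(B0 + 1):  # leftover goes to a saturated type
--         if G[b] is not None and G[b] < best:
--             best = G[b]
--     return best
-- ===== Notes on version B (the rewrite author's own statement) =====
-- stated objective: alternative
-- what changed: A enumerates every permutation of every partition of n into k parts and runs the full heap simulation on each; B sorts and groups the requests once, tabulates each requested type's waiting cost per counselor count (a min-scan over end times replaces the heap), and combines the types with a knapsack DP over extra counselors bounded by the request counts, with a track for dumping leftover counselors on a saturated or request-free type.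
-- intended difference: On k = 0 with n = 0, A returns its untouched sentinel 100000000000000000 although the empty assignment has zero total waiting; B returns the intended 0. — e.g. on solution(0, 0, []): A returns 100000000000000000, B returns 0
-- outside the precondition, e.g. on solution(3, 3, [[2, 3, -2], [6, 4, 2], [3, 5, 2]]): A returns 6, B returns 2; on solution(-1, -1, []): A returns 100000000000000000, B returns 0; on solution(0, 1, [[]]): A returns 100000000000000000, B raises IndexError
import Mathlib
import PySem

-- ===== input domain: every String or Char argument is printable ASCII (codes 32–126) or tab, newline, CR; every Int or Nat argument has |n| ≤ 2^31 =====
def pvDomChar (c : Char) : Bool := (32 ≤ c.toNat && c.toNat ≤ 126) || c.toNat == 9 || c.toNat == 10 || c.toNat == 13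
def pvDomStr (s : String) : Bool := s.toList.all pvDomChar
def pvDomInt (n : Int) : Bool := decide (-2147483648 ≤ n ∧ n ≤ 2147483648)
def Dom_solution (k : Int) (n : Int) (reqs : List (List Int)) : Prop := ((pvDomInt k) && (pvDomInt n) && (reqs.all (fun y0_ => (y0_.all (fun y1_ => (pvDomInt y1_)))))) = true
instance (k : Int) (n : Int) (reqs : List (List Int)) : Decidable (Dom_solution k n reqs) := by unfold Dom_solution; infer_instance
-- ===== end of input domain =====

-- B replaces A's enumeration of all permutations of all partitions (each fully re-simulated)
-- by a per-type cost table plus a knapsack DP over types; A's in-place sort of `reqs` is a side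
-- effect B does not reproduce (the claim is about the return value only).


-- ===== PORT A =====

-- heapq.heappush on a heap of ints, modelled as an ascending sorted list
-- (exact for the return value: heapq.heappop always yields the minimum, here the head).
def heapPush (h : List Int) (v : Int) : List Int :=
  PySem.List.insertBy (fun a b => decide (a < b)) v h

-- partition_helper: returns the list of partitions it appends to `l`, in append order.
def partitionHelper (n : Int) (k : Int) (cur : List Int) : List (List Int) :=
  if k = 1 then
    if n ≥ PySem.List.pyGetD cur (-1) 0 then [cur ++ [n]] else []
  else
    (PySem.List.pyRange 1 n 1).attach.flatMap (fun i =>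
      if i.1 ≥ PySem.List.pyGetD cur (-1) 0 then
        partitionHelper (n - i.1) (k - 1) (cur ++ [i.1])
      else [])
termination_by n.toNat
decreasing_by
  have h := PySem.List.mem_pyRange_one.mp i.2
  omega

def partitionA (n : Int) (k : Int) : List (List Int) :=
  if n < k then [] else partitionHelper n k [0]

-- one request row processed by simulate's first loop
def buildStep (k : Int) (l : List Int)
    (st : List (List Int) × List (List (Int × Int)) × List Int) (r : List Int) :
    List (List Int) × List (List (Int × Int)) × List Int :=
  let a := PySem.List.pyGetD r 0 0
  let b := PySem.List.pyGetD r 1 0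
  let c := PySem.List.pyGetD r 2 0
  let heaps := st.1
  let cands := st.2.1
  let count := st.2.2
  let count' := PySem.List.pySetD count c (PySem.List.pyGetD count c 0 + 1)
  if PySem.List.pyGetD l (c - 1) 0 ≠ ((PySem.List.pyGetD heaps c []).length : Int) then
    (PySem.List.pySetD heaps c (heapPush (PySem.List.pyGetD heaps c []) (a + b)), cands, count')
  else
    (heaps, PySem.List.pySetD cands c (PySem.List.pyGetD cands c [] ++ [(a, b)]), count')

-- simulate's final while-loop for one type (heap popped first, then cands checked from the back)
def popLoop : List Int → List (Int × Int) → Int → Int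
  | [], _, wait => wait
  | e :: hs, cs, wait =>
    if h : cs = [] then wait
    else
      let p := cs.getLast h
      if p.1 < e then
        popLoop (heapPush hs (e + p.2)) cs.dropLast (wait + e - p.1)
      else
        popLoop (heapPush hs (p.1 + p.2)) cs.dropLast wait
termination_by _ cs _ => cs.length
decreasing_by
  all_goals (simp only [List.length_dropLast]; have := List.length_pos_of_ne_nil h; omega)

def simulateA (k : Int) (n : Int) (regs : List (List Int)) (l : List Int) : Int :=
  let sz := (k + 1).toNat
  let heaps0 : List (List Int) := List.replicate sz []
  let cands0 : List (List (Int × Int)) := List.replicate sz []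
  let count0 : List Int := List.replicate sz 0
  let rs := PySem.List.sorted2 regs (fun x => PySem.List.pyGetD x 2 0) (fun x => PySem.List.pyGetD x 0 0) false
  let st := rs.foldl (buildStep k l) (heaps0, cands0, count0)
  let heaps := st.1
  let cands := st.2.1
  let count := st.2.2
  if (PySem.List.pyRange 1 (heaps.length : Int) 1).any
      (fun i => decide (PySem.List.pyGetD heaps i [] = []) && decide (PySem.List.pyGetD count i 0 ≠ 0)) then
    10 ^ 18
  else
    let cands' := cands.map (fun cs => PySem.List.sorted2 cs Prod.fst Prod.snd true)
    (PySem.List.pyRange 1 (k + 1) 1).foldl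
      (fun w i => popLoop (PySem.List.pyGetD heaps i []) (PySem.List.pyGetD cands' i []) w) 0

def solution (k : Int) (n : Int) (reqs : List (List Int)) : Int :=
  let ret := partitionA n k
  let l : PySem.Set (List Int) :=
    ret.foldl (fun s i => (PySem.List.permutations i i.length).foldl (fun s j => s.add j) s)
      (PySem.Set.ofList [])
  l.foldl (fun minValue i =>
    let value := simulateA k n reqs i
    if value < minValue then value else minValue) 100000000000000000

-- ===== PORT B =====

-- `if best is None or v < best: best = v`
def optMin (b : Option Int) (v : Int) : Option Int :=
  match b with
  | none => some v
  | some u => if v < u then some v else some u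

-- B's cost(rs, m): m counselors on this type's requests rs (in stable start order)
def costB (rs : List (Int × Int)) (m : Int) : Int :=
  let busy := (PySem.List.slice rs none (some m)).map (fun p => p.1 + p.2)
  let rest := PySem.List.sorted2 (PySem.List.slice rs (some m) none) Prod.fst Prod.snd false
  (rest.foldl (fun (st : List Int × Int) p =>
      -- min(busy) / busy.index(e): busy is nonempty whenever this loop runs
      let e := ((PySem.List.min? st.1 (fun x => x)).getD 0)
      let i := ((PySem.List.index? st.1 e).getD 0)
      if p.1 < e then (st.1.set i (e + p.2), st.2 + e - p.1)
      else (st.1.set i (p.1 + p.2), st.2)) (busy, 0)).2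

-- this type's requests, stable-sorted by start
def groupB (reqs : List (List Int)) (t : Int) : List (Int × Int) :=
  PySem.List.sorted
    ((reqs.filter (fun row => PySem.List.pyGetD row 2 0 == t)).map
      (fun row => (PySem.List.pyGetD row 0 0, PySem.List.pyGetD row 1 0)))
    Prod.fst false

-- sorted({row[2] for row in reqs if 1 <= row[2] <= k})
def typesB (k : Int) (reqs : List (List Int)) : List Int :=
  PySem.List.sorted
    (PySem.Set.ofList
      ((reqs.filter (fun row => decide (1 ≤ PySem.List.pyGetD row 2 0) &&
          decide (PySem.List.pyGetD row 2 0 ≤ k))).map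
        (fun row => PySem.List.pyGetD row 2 0)))
    (fun x => x) false

-- the inner `for e in range(0, min(b, cap) + 1)` loop of one DP cell
def dpInner (F G : List (Option Int)) (W : List Int) (b cap : Int) :
    Option Int × Option Int :=
  (PySem.List.pyRange 0 (min b cap + 1) 1).foldl
    (fun (p : Option Int × Option Int) e =>
      ((match PySem.List.pyGetD F (b - e) none with
        | none => p.1
        | some v => optMin p.1 (v + PySem.List.pyGetD W e 0)),
       (match PySem.List.pyGetD G (b - e) none with
        | none => p.2
        | some v => optMin p.2 (v + PySem.List.pyGetD W e 0)))) (none, none)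

-- one DP step: (F, G) after the earlier types becomes (F2, G2) after type t
def dpStepB (reqs : List (List Int)) (B0 : Int)
    (FG : List (Option Int) × List (Option Int)) (t : Int) :
    List (Option Int) × List (Option Int) :=
  let rs := groupB reqs t
  let cap : Int := (rs.length : Int) - 1
  let W := (PySem.List.pyRange 1 ((rs.length : Int) + 1) 1).map (fun m => costB rs m)
  let rows := (PySem.List.pyRange 0 (B0 + 1) 1).map (fun b =>
    let bb := dpInner FG.1 FG.2 W b cap
    (bb.1,
     if b ≥ cap then
       match PySem.List.pyGetD FG.1 (b - cap) none with
       | none => bb.2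
       | some v => optMin bb.2 (v + PySem.List.pyGetD W cap 0)
     else bb.2))
  (rows.map Prod.fst, rows.map Prod.snd)

def solution_alt (k : Int) (n : Int) (reqs : List (List Int)) : Int :=
  let BIG : Int := 100000000000000000
  if n < k then BIG
  else
    let ts := typesB k reqs
    let caps := ts.map (fun t =>
      ((reqs.filter (fun row => PySem.List.pyGetD row 2 0 == t)).length : Int) - 1)
    let B0 := min (n - k) caps.sum
    let F0 : List (Option Int) := some 0 :: List.replicate B0.toNat none
    let G0 : List (Option Int) := List.replicate (B0 + 1).toNat none
    let FG := ts.foldl (dpStepB reqs B0) (F0, G0)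
    let best1 := if n - k ≤ B0 then
        match PySem.List.pyGetD FG.1 (n - k) none with
        | none => BIG
        | some v => if v < BIG then v else BIG
      else BIG
    let best2 := if (ts.length : Int) < k then
        (PySem.List.pyRange 0 (B0 + 1) 1).foldl (fun best b =>
          match PySem.List.pyGetD FG.1 b none with
          | none => best
          | some v => if v < best then v else best) best1
      else best1
    (PySem.List.pyRange 0 (B0 + 1) 1).foldl (fun best b =>
      match PySem.List.pyGetD FG.2 b none with
      | none => best
      | some v => if v < best then v else best) best2

-- ===== PRECONDITION & SPEC =====

-- Pre_ restricts to the natural domain: n ≥ 0 (n is a counselor count), and whenever the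
-- requests are actually read (k ≤ n) every request must be a 3-field row, with a type in
-- 1..k when the search runs (1 ≤ k ≤ n): other shapes make A raise (ValueError/IndexError)
-- or B raise where A never reads them, and types outside 1..k are read through Python's
-- negative-index wraparound, an artefact of A's list indexing.
def Pre_solution (k : Int) (n : Int) (reqs : List (List Int)) : Prop :=
  0 ≤ n ∧ (k ≤ n → ∀ r ∈ reqs, r.length = 3) ∧
    ((1 ≤ k ∧ k ≤ n) → ∀ r ∈ reqs, 1 ≤ r.getD 2 0 ∧ r.getD 2 0 ≤ k)
instance (k : Int) (n : Int) (reqs : List (List Int)) : Decidable (Pre_solution k n reqs) := by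
  unfold Pre_solution; infer_instance

def pvWitness_solution : Int × Int × List (List Int) := (2, 3, [[0, 2, 1], [1, 3, 2], [2, 1, 1]])

-- On k = 0 with n = 0, A returns its untouched sentinel 100000000000000000 although the
-- empty assignment (no types, no counselors) has zero total waiting; B returns the intended 0.
def D_solution (k : Int) (n : Int) (reqs : List (List Int)) : Prop := k = 0 ∧ n = 0
instance (k : Int) (n : Int) (reqs : List (List Int)) : Decidable (D_solution k n reqs) := by
  unfold D_solution; infer_instance

def Spec_solution (k : Int) (n : Int) (reqs : List (List Int)) (out : Int) : Prop :=
  ¬ D_solution k n reqs → out = solution_alt k n reqs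
instance (k : Int) (n : Int) (reqs : List (List Int)) (out : Int) : Decidable (Spec_solution k n reqs out) := by
  unfold Spec_solution; infer_instance

def pvDiffWitness_solution : Int × Int × List (List Int) := (0, 0, [])
def pvDiffWitnessOut_solution : Int × Int := (100000000000000000, 0)

-- ===== CLAIM (what is proved, stated in full; the proofs are below) =====
def Claim_unchanged_solution : Prop := ∀ (k : Int) (n : Int) (reqs : List (List Int)), Dom_solution k n reqs → Pre_solution k n reqs → Spec_solution k n reqs (solution k n reqs)
def Claim_changed_solution : Prop := Dom_solution (pvDiffWitness_solution.1) (pvDiffWitness_solution.2.1) (pvDiffWitness_solution.2.2) ∧ Pre_solution (pvDiffWitness_solution.1) (pvDiffWitness_solution.2.1) (pvDiffWitness_solution.2.2) ∧ D_solution (pvDiffWitness_solution.1) (pvDiffWitness_solution.2.1) (pvDiffWitness_solution.2.2) ∧ solution (pvDiffWitness_solution.1) (pvDiffWitness_solution.2.1) (pvDiffWitness_solution.2.2) = pvDiffWitnessOut_solution.1 ∧ solution_alt (pvDiffWitness_solution.1) (pvDiffWitness_solution.2.1) (pvDiffWitness_solution.2.2) = pvDiffWitnessOut_solution.2 ∧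 pvDiffWitnessOut_solution.1 ≠ pvDiffWitnessOut_solution.2
def Claim_exact_solution : Prop := ∀ (k : Int) (n : Int) (reqs : List (List Int)), Dom_solution k n reqs → Pre_solution k n reqs → D_solution k n reqs → solution k n reqs ≠ solution_alt k n reqs

-- ===== LEMMAS AND PROOFS =====

-- ---------- generic toolkit ----------

theorem insertBy_perm {α : Type} (before : α → α → Bool) (x : α) (ys : List α) :
    (PySem.List.insertBy before x ys).Perm (x :: ys) := by
  induction ys with
  | nil => simp [PySem.List.insertBy]
  | cons y ys ih =>
    simp only [PySem.List.insertBy]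
    split
    · exact List.Perm.refl _
    · exact (ih.cons y).trans (List.Perm.swap x y ys)

theorem insertBy_append_false {α : Type} (before : α → α → Bool) (x : α) (B C : List α)
    (h : ∀ y ∈ B, before x y = false) :
    PySem.List.insertBy before x (B ++ C) = B ++ PySem.List.insertBy before x C := by
  induction B with
  | nil => rfl
  | cons b B ih =>
    have hb : before x b = false := h b (by simp)
    simp only [List.cons_append, PySem.List.insertBy, hb]
    simp only [ih (fun y hy => h y (by simp [hy])), Bool.false_eq_true, if_false]

theorem insertBy_append_true {α : Type} (before : α → α → Bool) (x : α) (B C : List α)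
    (h : ∀ y ∈ C, before x y = true) :
    PySem.List.insertBy before x (B ++ C) = (PySem.List.insertBy before x B) ++ C := by
  induction B with
  | nil =>
    cases C with
    | nil => rfl
    | cons c C => simp [PySem.List.insertBy, h c (by simp)]
  | cons b B ih =>
    simp only [List.cons_append, PySem.List.insertBy]
    split
    · rfl
    · simp [ih]

theorem insertBy_congr {α : Type} (before before' : α → α → Bool) (x : α) (ys : List α)
    (h : ∀ y ∈ ys, before x y = before' x y) :
    PySem.List.insertBy before x ys = PySem.List.insertBy before' x ys := by
  induction ys with
  | nil => rfl
  | cons y ys ih =>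
    simp only [PySem.List.insertBy, h y (by simp)]
    split
    · rfl
    · simp [ih (fun z hz => h z (by simp [hz]))]

theorem insertBy_map {α β : Type} (before : α → α → Bool) (before' : β → β → Bool)
    (f : α → β) (x : α) (ys : List α)
    (h : ∀ y ∈ ys, before' (f x) (f y) = before x y) :
    PySem.List.insertBy before' (f x) (ys.map f) = (PySem.List.insertBy before x ys).map f := by
  induction ys with
  | nil => rfl
  | cons y ys ih =>
    simp only [List.map_cons, PySem.List.insertBy, h y (by simp)]
    split
    · rfl
    · simp [ih (fun z hz => h z (by simp [hz]))]

theorem pairwise_insertBy {α : Type} (R : α → α → Prop) (before : α → α → Bool)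
    (htrans : ∀ a b c, R a b → R b c → R a c)
    (h1 : ∀ a b, before a b = true → R a b)
    (h2 : ∀ a b, before a b = false → R b a)
    (x : α) (ys : List α) (hp : ys.Pairwise R) :
    (PySem.List.insertBy before x ys).Pairwise R := by
  induction ys with
  | nil => simp [PySem.List.insertBy]
  | cons y ys ih =>
    rcases List.pairwise_cons.mp hp with ⟨hy, hys⟩
    simp only [PySem.List.insertBy]
    split
    · rename_i hb
      refine List.pairwise_cons.mpr ⟨?_, hp⟩
      intro z hz
      rcases hz with _ | hz
      · exact h1 _ _ hb
      · exact htrans _ _ _ (h1 _ _ hb) (hy _ (by assumption))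
    · rename_i hb
      refine List.pairwise_cons.mpr ⟨?_, ih hys⟩
      intro z hz
      rcases (PySem.List.mem_insertBy _ _ _ _).mp hz with rfl | hz
      · exact h2 _ _ (by simpa using hb)
      · exact hy _ hz

theorem eq_of_perm_of_pairwise_antisymm {α : Type} (R : α → α → Prop)
    (hanti : ∀ a b, R a b → R b a → a = b)
    (l₁ l₂ : List α) (hp : l₁.Perm l₂) (h1 : l₁.Pairwise R) (h2 : l₂.Pairwise R) : l₁ = l₂ := by
  exact List.Perm.eq_of_pairwise (fun a b _ _ hab hba => hanti a b hab hba) h1 h2 hp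

-- running minimum fold
def FM (b : Int) (xs : List Int) : Int := xs.foldl min b

theorem FM_le_init (b : Int) (xs : List Int) : FM b xs ≤ b := by
  induction xs generalizing b with
  | nil => simp [FM]
  | cons x xs ih => exact le_trans (ih (min b x)) (by simp [min_le_left])

theorem FM_le_mem (b : Int) (xs : List Int) (x : Int) (hx : x ∈ xs) : FM b xs ≤ x := by
  induction xs generalizing b with
  | nil => simp at hx
  | cons y ys ih =>
    rcases List.mem_cons.mp hx with rfl | hx
    · exact le_trans (FM_le_init (min b x) ys) (min_le_right _ _)
    · exact ih (min b y) hx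

theorem FM_mem (b : Int) (xs : List Int) : FM b xs = b ∨ FM b xs ∈ xs := by
  induction xs generalizing b with
  | nil => left; rfl
  | cons x xs ih =>
    rcases ih (min b x) with h | h
    · rcases le_total b x with hbx | hbx
      · left; show FM (min b x) xs = b; rw [h, min_eq_left hbx]
      · right
        refine List.mem_cons.mpr (Or.inl ?_)
        show FM (min b x) xs = x; rw [h, min_eq_right hbx]
    · exact Or.inr (List.mem_cons.mpr (Or.inr h))

theorem FM_eq_of_mem (b c : Int) (xs ys : List Int) (hbc : b < c)
    (h1 : ∀ y ∈ ys, y ∈ xs) (h2 : ∀ x ∈ xs, x ∈ ys ∨ c ≤ x) :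
    FM b xs = FM b ys := by
  apply le_antisymm
  · rcases FM_mem b ys with h | h
    · rw [h]; exact FM_le_init _ _
    · exact FM_le_mem _ _ _ (h1 _ h)
  · rcases FM_mem b xs with h | h
    · rw [h]; exact FM_le_init _ _
    · rcases h2 _ h with hm | hc
      · exact FM_le_mem _ _ _ hm
      · exact le_trans (le_trans (FM_le_init _ _) (le_of_lt hbc)) hc

-- optional-minimum algebra
def minO (xs : List Int) : Option Int := xs.foldl (fun b v => optMin b v) none

def omin2 (a b : Option Int) : Option Int :=
  match b with
  | none => a
  | some v => optMin a v

theorem optMin_eq (b : Option Int) (v : Int) : optMin b v = some (match b with | none => v | some u => min u v) := by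
  cases b with
  | none => rfl
  | some u =>
    show (if v < u then some v else some u) = some (min u v)
    by_cases h : v < u
    · simp [h, min_eq_right (le_of_lt h)]
    · simp [h, min_eq_left (by omega : u ≤ v)]

theorem foldl_optMin_some (xs : List Int) : ∀ u : Int,
    xs.foldl (fun b v => optMin b v) (some u) = some (FM u xs) := by
  induction xs with
  | nil => intro u; rfl
  | cons x xs ih =>
    intro u
    show xs.foldl (fun b v => optMin b v) (optMin (some u) x) = _
    rw [optMin_eq]
    show xs.foldl (fun b v => optMin b v) (some (min u x)) = _
    rw [ih (min u x)]
    rfl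

theorem minO_cons (x : Int) (xs : List Int) : minO (x :: xs) = some (FM x xs) := by
  show (x :: xs).foldl (fun b v => optMin b v) none = _
  simp only [List.foldl_cons]
  show xs.foldl (fun b v => optMin b v) (some x) = _
  exact foldl_optMin_some xs x

theorem minO_nil : minO [] = none := rfl

theorem FM_append (u : Int) (xs ys : List Int) : FM u (xs ++ ys) = FM (FM u xs) ys := by
  simp [FM, List.foldl_append]

theorem FM_min (u v : Int) (xs : List Int) : FM (min u v) xs = min u (FM v xs) := by
  induction xs generalizing v with
  | nil => simp [FM]
  | cons x xs ih =>
    show FM (min (min u v) x) xs = min u (FM (min v x) xs)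
    rw [min_assoc, ih]

theorem minO_append (xs ys : List Int) : minO (xs ++ ys) = omin2 (minO xs) (minO ys) := by
  cases xs with
  | nil =>
    simp only [List.nil_append, minO_nil]
    cases ys with
    | nil => rfl
    | cons y ys => rw [minO_cons]; rfl
  | cons x xs =>
    rw [List.cons_append, minO_cons, minO_cons, FM_append]
    cases ys with
    | nil => rfl
    | cons y ys =>
      rw [minO_cons]
      show _ = optMin (some (FM x xs)) (FM y ys)
      rw [optMin_eq]
      show some (FM (min (FM x xs) y) ys) = _
      rw [FM_min]

theorem minO_map_add (xs : List Int) (w : Int) : minO (xs.map (· + w)) = (minO xs).map (· + w) := by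
  cases xs with
  | nil => rfl
  | cons x xs =>
    rw [List.map_cons, minO_cons, minO_cons]
    simp only [Option.map_some]
    congr 1
    induction xs generalizing x with
    | nil => rfl
    | cons y ys ih =>
      show FM (min (x + w) (y + w)) (ys.map (· + w)) = FM (min x y) ys + w
      have : min (x + w) (y + w) = min x y + w := by omega
      rw [this, ih]

-- ---------- sorted2 as foldl, order facts ----------

def lexlt (p q : Int × Int) : Bool := decide (p.1 < q.1) || (!decide (q.1 < p.1) && decide (p.2 < q.2))
def lexle (p q : Int × Int) : Prop := p.1 < q.1 ∨ (p.1 = q.1 ∧ p.2 ≤ q.2)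

theorem sorted2_asc_eq (xs : List (Int × Int)) :
    PySem.List.sorted2 xs Prod.fst Prod.snd false =
      xs.foldl (fun acc x => PySem.List.insertBy lexlt x acc) [] := rfl

theorem sorted2_desc_eq (xs : List (Int × Int)) :
    PySem.List.sorted2 xs Prod.fst Prod.snd true =
      xs.foldl (fun acc x => PySem.List.insertBy (fun a b => lexlt b a) x acc) [] := rfl

theorem lexle_trans (a b c : Int × Int) (h1 : lexle a b) (h2 : lexle b c) : lexle a c := by
  unfold lexle at *; omega

theorem lexle_antisymm (a b : Int × Int) (h1 : lexle a b) (h2 : lexle b a) : a = b := by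
  unfold lexle at *
  have : a.1 = b.1 ∧ a.2 = b.2 := by omega
  exact Prod.ext this.1 this.2

theorem lexlt_true_le (a b : Int × Int) (h : lexlt a b = true) : lexle a b := by
  unfold lexlt at h; unfold lexle
  simp only [Bool.or_eq_true, Bool.and_eq_true, Bool.not_eq_true', decide_eq_true_eq,
    decide_eq_false_iff_not] at h
  omega

theorem lexlt_false_le (a b : Int × Int) (h : lexlt a b = false) : lexle b a := by
  unfold lexlt at h; unfold lexle
  simp only [Bool.or_eq_false_iff, Bool.and_eq_false_iff, Bool.not_eq_false', decide_eq_true_eq,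
    decide_eq_false_iff_not] at h
  rcases h with ⟨h1, h2⟩
  rcases h2 with h2 | h2 <;> omega

theorem pairwise_foldl_insertBy {α : Type} (R : α → α → Prop) (before : α → α → Bool)
    (htrans : ∀ a b c, R a b → R b c → R a c)
    (h1 : ∀ a b, before a b = true → R a b)
    (h2 : ∀ a b, before a b = false → R b a)
    (xs : List α) : ∀ acc : List α, acc.Pairwise R →
    (xs.foldl (fun acc x => PySem.List.insertBy before x acc) acc).Pairwise R := by
  induction xs with
  | nil => intro acc h; exact h
  | cons x xs ih =>
    intro acc hacc
    exact ih _ (pairwise_insertBy R before htrans h1 h2 x acc hacc)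

theorem sorted2_asc_pairwise (xs : List (Int × Int)) :
    (PySem.List.sorted2 xs Prod.fst Prod.snd false).Pairwise lexle := by
  rw [sorted2_asc_eq]
  exact pairwise_foldl_insertBy lexle lexlt lexle_trans lexlt_true_le lexlt_false_le xs [] (by simp)

theorem sorted2_desc_pairwise (xs : List (Int × Int)) :
    (PySem.List.sorted2 xs Prod.fst Prod.snd true).Pairwise (fun a b => lexle b a) := by
  rw [sorted2_desc_eq]
  exact pairwise_foldl_insertBy (fun a b => lexle b a) (fun a b => lexlt b a)
    (fun a b c h1 h2 => lexle_trans c b a h2 h1)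
    (fun a b h => lexlt_true_le b a h)
    (fun a b h => lexlt_false_le b a h) xs [] (by simp)

theorem sorted2_desc_reverse (xs : List (Int × Int)) :
    (PySem.List.sorted2 xs Prod.fst Prod.snd true).reverse =
      PySem.List.sorted2 xs Prod.fst Prod.snd false := by
  apply eq_of_perm_of_pairwise_antisymm lexle lexle_antisymm
  · exact ((List.reverse_perm _).trans (PySem.List.sorted2_perm xs _ _ true)).trans
      (PySem.List.sorted2_perm xs _ _ false).symm
  · rw [List.pairwise_reverse]
    exact sorted2_desc_pairwise xs
  · exact sorted2_asc_pairwise xs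

-- B's group = map of A's per-type sorted rows
def rowA' (r : List Int) : Int := PySem.List.pyGetD r 0 0
def rowB' (r : List Int) : Int := PySem.List.pyGetD r 1 0
def rowC' (r : List Int) : Int := PySem.List.pyGetD r 2 0
def rowP' (r : List Int) : Int × Int := (rowA' r, rowB' r)

def grpRows (reqs : List (List Int)) (t : Int) : List (List Int) :=
  PySem.List.sorted (reqs.filter (fun r => rowC' r == t)) rowA' false

theorem sorted_map {α β κ : Type} [LT κ] [DecidableLT κ] (f : α → β) (key : β → κ) (xs : List α) :
    PySem.List.sorted (xs.map f) key false = (PySem.List.sorted xs (fun a => key (f a)) false).map f := by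
  rw [PySem.List.sorted_eq_foldl_insertBy, PySem.List.sorted_eq_foldl_insertBy, List.foldl_map]
  induction xs using List.reverseRecOn with
  | nil => rfl
  | append_singleton xs x ih =>
    rw [List.foldl_append, List.foldl_append, List.foldl_cons, List.foldl_cons, List.foldl_nil,
      List.foldl_nil, ih]
    exact (insertBy_map (fun a b => decide (key (f a) < key (f b))) (fun a b => decide (key a < key b)) f x _ (fun y _ => rfl))

theorem groupB_eq (reqs : List (List Int)) (t : Int) :
    groupB reqs t = (grpRows reqs t).map rowP' := by
  unfold groupB grpRows
  exact sorted_map rowP' Prod.fst (reqs.filter (fun r => rowC' r == t))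

def rowLex (a b : List Int) : Bool :=
  decide (rowC' a < rowC' b) || (!decide (rowC' b < rowC' a) && decide (rowA' a < rowA' b))

theorem sorted2_rows_eq (regs : List (List Int)) :
    PySem.List.sorted2 regs (fun x => PySem.List.pyGetD x 2 0) (fun x => PySem.List.pyGetD x 0 0) false =
      regs.foldl (fun acc x => PySem.List.insertBy rowLex x acc) [] := rfl

theorem mem_grpRows (regs : List (List Int)) (t : Int) (y : List Int)
    (hy : y ∈ grpRows regs t) : rowC' y = t := by
  unfold grpRows at hy
  have h1 := (PySem.List.mem_sorted _ _ _ _).mp hy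
  have h2 := List.mem_filter.mp h1
  simpa using h2.2

theorem grpRows_nil (t : Int) : grpRows [] t = [] := rfl

theorem grpRows_append (xs : List (List Int)) (r : List Int) (t : Int) :
    grpRows (xs ++ [r]) t =
      if rowC' r = t then
        PySem.List.insertBy (fun a b => decide (rowA' a < rowA' b)) r (grpRows xs t)
      else grpRows xs t := by
  unfold grpRows
  rw [List.filter_append]
  by_cases h : rowC' r = t
  · have : List.filter (fun r => rowC' r == t) [r] = [r] := by simp [h]
    rw [this, if_pos h, PySem.List.sorted_eq_foldl_insertBy, PySem.List.sorted_eq_foldl_insertBy,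
      List.foldl_append, List.foldl_cons, List.foldl_nil]
  · have : List.filter (fun r => rowC' r == t) [r] = [] := by simp [h]
    rw [this, if_neg h, List.append_nil]

theorem flatMap_congr' {α β : Type} (l : List α) (f g : α → List β)
    (h : ∀ x ∈ l, f x = g x) : l.flatMap f = l.flatMap g := by
  induction l with
  | nil => rfl
  | cons x xs ih => simp only [List.flatMap_cons, h x (by simp), ih (fun y hy => h y (by simp [hy]))]

-- the stable (type, start) sort splits into per-type blocks
theorem sorted2_blocks (k : Int) (regs : List (List Int))
    (hc : ∀ r ∈ regs, 1 ≤ rowC' r ∧ rowC' r ≤ k) :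
    PySem.List.sorted2 regs (fun x => PySem.List.pyGetD x 2 0) (fun x => PySem.List.pyGetD x 0 0) false =
      (PySem.List.pyRange 1 (k + 1) 1).flatMap (fun t => grpRows regs t) := by
  induction regs using List.reverseRecOn with
  | nil =>
    rw [sorted2_rows_eq]
    simp [List.flatMap_eq_nil_iff, grpRows_nil]
  | append_singleton xs r ih =>
    have hc' : ∀ y ∈ xs, 1 ≤ rowC' y ∧ rowC' y ≤ k := fun y hy => hc y (by simp [hy])
    have hcr := hc r (by simp)
    have hrange1 : PySem.List.pyRange 1 (k + 1) 1 =
        PySem.List.pyRange 1 (rowC' r) 1 ++ PySem.List.pyRange (rowC' r) (k + 1) 1 :=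
      PySem.List.pyRange_one_append 1 (rowC' r) (k + 1) (by omega) (by omega)
    have hrange2 : PySem.List.pyRange (rowC' r) (k + 1) 1 =
        rowC' r :: PySem.List.pyRange (rowC' r + 1) (k + 1) 1 :=
      PySem.List.pyRange_one_cons (by omega)
    rw [sorted2_rows_eq, List.foldl_append, List.foldl_cons, List.foldl_nil, ← sorted2_rows_eq, ih hc']
    rw [hrange1, hrange2] at *
    rw [List.flatMap_append, List.flatMap_cons, List.flatMap_append, List.flatMap_cons]
    have hBl : ∀ y ∈ (PySem.List.pyRange 1 (rowC' r) 1).flatMap (fun t => grpRows xs t),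
        rowLex r y = false := by
      intro y hy
      rcases List.mem_flatMap.mp hy with ⟨t, ht, hyt⟩
      have h1 := (PySem.List.mem_pyRange_one).mp ht
      have h2 := mem_grpRows xs t y hyt
      unfold rowLex
      simp only [Bool.or_eq_false_iff, Bool.and_eq_false_iff, Bool.not_eq_false',
        decide_eq_false_iff_not, decide_eq_true_eq]
      constructor
      · omega
      · left; omega
    have hBr : ∀ y ∈ (PySem.List.pyRange (rowC' r + 1) (k + 1) 1).flatMap (fun t => grpRows xs t),
        rowLex r y = true := by
      intro y hy
      rcases List.mem_flatMap.mp hy with ⟨t, ht, hyt⟩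
      have h1 := (PySem.List.mem_pyRange_one).mp ht
      have h2 := mem_grpRows xs t y hyt
      unfold rowLex
      simp only [Bool.or_eq_true, decide_eq_true_eq]
      left; omega
    rw [insertBy_append_false rowLex r _ _ hBl]
    rw [insertBy_append_true rowLex r _ _ hBr]
    have hmid : PySem.List.insertBy rowLex r (grpRows xs (rowC' r)) =
        PySem.List.insertBy (fun a b => decide (rowA' a < rowA' b)) r (grpRows xs (rowC' r)) := by
      apply insertBy_congr
      intro y hy
      have h2 := mem_grpRows xs (rowC' r) y hy
      unfold rowLex
      simp [h2]
    rw [hmid]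
    congr 1
    · exact flatMap_congr' _ _ _ (fun t ht => by
        have h1 := (PySem.List.mem_pyRange_one).mp ht
        rw [grpRows_append, if_neg (by omega)])
    · congr 1
      · rw [grpRows_append, if_pos rfl]
      · exact flatMap_congr' _ _ _ (fun t ht => by
          have h1 := (PySem.List.mem_pyRange_one).mp ht
          rw [grpRows_append, if_neg (by omega)])

-- ---------- simulate decomposition ----------

-- index/update glue
theorem pyGetD_pySetD_self {α : Type} (xs : List α) (t : Int) (d v : α)
    (h0 : 0 ≤ t) (h : t.toNat < xs.length) :
    PySem.List.pyGetD (PySem.List.pySetD xs t v) t d = v := by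
  rw [PySem.List.pySetD_of_nonneg _ _ h0,
    PySem.List.pyGetD_eq_getElem _ _ h0 (by simp only [List.length_set]; push_cast; omega)]
  simp [List.getElem_set_self]

theorem pyGetD_pySetD_ne {α : Type} (xs : List α) (t j : Int) (d v : α)
    (h0 : 0 ≤ t) (hj : 0 ≤ j) (hne : j ≠ t) (hjlen : j.toNat < xs.length) :
    PySem.List.pyGetD (PySem.List.pySetD xs t v) j d = PySem.List.pyGetD xs j d := by
  rw [PySem.List.pySetD_of_nonneg _ _ h0,
    PySem.List.pyGetD_eq_getElem _ _ hj (by simp only [List.length_set]; push_cast; omega),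
    PySem.List.pyGetD_eq_getElem _ _ hj (by push_cast; omega)]
  rw [List.getElem_set_ne (by omega)]

theorem pySetD_pySetD {α : Type} (xs : List α) (t : Int) (v w : α) (h0 : 0 ≤ t) :
    PySem.List.pySetD (PySem.List.pySetD xs t v) t w = PySem.List.pySetD xs t w := by
  rw [PySem.List.pySetD_of_nonneg _ _ h0, PySem.List.pySetD_of_nonneg _ _ h0,
    PySem.List.pySetD_of_nonneg _ _ h0, List.set_set]

theorem pySetD_self {α : Type} (xs : List α) (t : Int) (d : α)
    (h0 : 0 ≤ t) (h : t.toNat < xs.length) :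
    PySem.List.pySetD xs t (PySem.List.pyGetD xs t d) = xs := by
  rw [PySem.List.pySetD_of_nonneg _ _ h0,
    PySem.List.pyGetD_eq_getElem _ _ h0 (by push_cast; omega)]
  exact List.set_getElem_self (by omega)

-- heap facts
theorem length_insertBy {α : Type} (before : α → α → Bool) (x : α) (ys : List α) :
    (PySem.List.insertBy before x ys).length = ys.length + 1 :=
  (insertBy_perm before x ys).length_eq

theorem heapFold_perm (xs : List Int) : ∀ H : List Int,
    (xs.foldl heapPush H).Perm (H ++ xs) := by
  induction xs with
  | nil => intro H; simp
  | cons x xs ih =>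
    intro H
    refine (ih (heapPush H x)).trans ?_
    have h1 : (heapPush H x).Perm (x :: H) := insertBy_perm _ x H
    refine (h1.append_right xs).trans ?_
    exact (List.perm_middle).symm

theorem heapFold_pairwise (xs : List Int) (H : List Int) (hH : H.Pairwise (· ≤ ·)) :
    (xs.foldl heapPush H).Pairwise (· ≤ ·) := by
  have := pairwise_foldl_insertBy (fun a b : Int => a ≤ b) (fun a b => decide (a < b))
    (fun a b c h1 h2 => le_trans h1 h2)
    (fun a b h => le_of_lt (by simpa using h))
    (fun a b h => by simpa using h) xs H hH
  exact this

theorem heapPush_pairwise (H : List Int) (v : Int) (hH : H.Pairwise (· ≤ ·)) :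
    (heapPush H v).Pairwise (· ≤ ·) :=
  heapFold_pairwise [v] H hH

theorem length_heapPush (H : List Int) (v : Int) : (heapPush H v).length = H.length + 1 :=
  length_insertBy _ v H

-- phase-1 per-row step on one type's private state
def local1 (m : Int) (st : List Int × List (Int × Int) × Int) (r : List Int) :
    List Int × List (Int × Int) × Int :=
  if m ≠ (st.1.length : Int) then (heapPush st.1 (rowA' r + rowB' r), st.2.1, st.2.2 + 1)
  else (st.1, st.2.1 ++ [rowP' r], st.2.2 + 1)

theorem local1_char (m : Int) (hm : 0 ≤ m) (g : List (List Int)) :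
    ∀ (H : List Int) (C : List (Int × Int)) (cnt : Int), H.length ≤ m.toNat →
    g.foldl (local1 m) (H, C, cnt) =
      (((g.take (m.toNat - H.length)).map (fun r => rowA' r + rowB' r)).foldl heapPush H,
       C ++ (g.drop (m.toNat - H.length)).map rowP',
       cnt + g.length) := by
  induction g with
  | nil => intro H C cnt h; simp
  | cons r g ih =>
    intro H C cnt h
    by_cases hEq : m = (H.length : Int)
    · have h0 : m.toNat - H.length = 0 := by omega
      simp only [List.foldl_cons, local1, ne_eq]
      rw [if_neg (by omega)]
      rw [ih H (C ++ [rowP' r]) (cnt + 1) h, h0]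
      simp only [List.take_zero, List.map_nil, List.foldl_nil, List.drop_zero, List.map_cons,
        List.length_cons, List.append_assoc, List.singleton_append]
      refine Prod.ext rfl (Prod.ext rfl ?_)
      push_cast; ring
    · have hlt : H.length < m.toNat := by omega
      simp only [List.foldl_cons, local1, ne_eq]
      rw [if_pos (by omega)]
      rw [ih (heapPush H (rowA' r + rowB' r)) C (cnt + 1) (by rw [length_heapPush]; omega),
        length_heapPush]
      have h1 : m.toNat - H.length = (m.toNat - (H.length + 1)) + 1 := by omega
      rw [h1, List.take_succ_cons, List.drop_succ_cons, List.map_cons, List.foldl_cons]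
      refine Prod.ext rfl (Prod.ext rfl ?_)
      simp only [List.length_cons]
      push_cast; ring

-- phase-1: one whole type's block from the global state
theorem build_block (k : Int) (l : List Int) (t : Int) (g : List (List Int))
    (hg : ∀ y ∈ g, rowC' y = t) (h0 : 0 ≤ t) :
    ∀ (S : List (List Int) × List (List (Int × Int)) × List Int),
    t.toNat < S.1.length → t.toNat < S.2.1.length → t.toNat < S.2.2.length →
    g.foldl (buildStep k l) S =
      (PySem.List.pySetD S.1 t (g.foldl (local1 (PySem.List.pyGetD l (t - 1) 0))
          (PySem.List.pyGetD S.1 t [], PySem.List.pyGetD S.2.1 t [], PySem.List.pyGetD S.2.2 t 0)).1,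
       PySem.List.pySetD S.2.1 t (g.foldl (local1 (PySem.List.pyGetD l (t - 1) 0))
          (PySem.List.pyGetD S.1 t [], PySem.List.pyGetD S.2.1 t [], PySem.List.pyGetD S.2.2 t 0)).2.1,
       PySem.List.pySetD S.2.2 t (g.foldl (local1 (PySem.List.pyGetD l (t - 1) 0))
          (PySem.List.pyGetD S.1 t [], PySem.List.pyGetD S.2.1 t [], PySem.List.pyGetD S.2.2 t 0)).2.2) := by
  induction g with
  | nil =>
    intro S h1 h2 h3
    simp only [List.foldl_nil]
    rw [pySetD_self _ _ _ h0 h1, pySetD_self _ _ _ h0 h2, pySetD_self _ _ _ h0 h3]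
  | cons r g ih =>
    intro S h1 h2 h3
    have hr : PySem.List.pyGetD r 2 0 = t := hg r (by simp)
    have hg' : ∀ y ∈ g, rowC' y = t := fun y hy => hg y (by simp [hy])
    obtain ⟨heaps, cands, count⟩ := S
    simp only at h1 h2 h3
    simp only [List.foldl_cons, buildStep, hr]
    by_cases hcond : PySem.List.pyGetD l (t - 1) 0 ≠ ((PySem.List.pyGetD heaps t []).length : Int)
    · rw [if_pos hcond]
      rw [ih hg' (PySem.List.pySetD heaps t (heapPush (PySem.List.pyGetD heaps t [])
            (PySem.List.pyGetD r 0 0 + PySem.List.pyGetD r 1 0)), cands,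
            PySem.List.pySetD count t (PySem.List.pyGetD count t 0 + 1))
          (by simp [PySem.List.length_pySetD]; omega)
          (by simpa using h2)
          (by simp [PySem.List.length_pySetD]; omega)]
      simp only
      rw [pyGetD_pySetD_self heaps t [] _ h0 (by omega),
        pyGetD_pySetD_self count t 0 _ h0 (by omega),
        pySetD_pySetD heaps t _ _ h0, pySetD_pySetD count t _ _ h0]
      rw [show local1 (PySem.List.pyGetD l (t - 1) 0)
          (PySem.List.pyGetD heaps t [], PySem.List.pyGetD cands t [], PySem.List.pyGetD count t 0) r =
          (heapPush (PySem.List.pyGetD heaps t []) (rowA' r + rowB' r),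
           PySem.List.pyGetD cands t [], PySem.List.pyGetD count t 0 + 1) from by
        simp only [local1]; rw [if_pos hcond]]
      rfl
    · rw [if_neg hcond]
      rw [ih hg' (heaps, PySem.List.pySetD cands t (PySem.List.pyGetD cands t [] ++
            [(PySem.List.pyGetD r 0 0, PySem.List.pyGetD r 1 0)]),
            PySem.List.pySetD count t (PySem.List.pyGetD count t 0 + 1))
          (by simpa using h1)
          (by simp [PySem.List.length_pySetD]; omega)
          (by simp [PySem.List.length_pySetD]; omega)]
      simp only
      rw [pyGetD_pySetD_self cands t [] _ h0 (by omega),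
        pyGetD_pySetD_self count t 0 _ h0 (by omega),
        pySetD_pySetD cands t _ _ h0, pySetD_pySetD count t _ _ h0]
      rw [show local1 (PySem.List.pyGetD l (t - 1) 0)
          (PySem.List.pyGetD heaps t [], PySem.List.pyGetD cands t [], PySem.List.pyGetD count t 0) r =
          (PySem.List.pyGetD heaps t [],
           PySem.List.pyGetD cands t [] ++ [rowP' r], PySem.List.pyGetD count t 0 + 1) from by
        simp only [local1]; rw [if_neg hcond]]
      rfl

theorem build_lengths (k : Int) (l : List Int) (rows : List (List Int)) :
    ∀ (S : List (List Int) × List (List (Int × Int)) × List Int),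
    ((rows.foldl (buildStep k l) S).1.length = S.1.length ∧
     (rows.foldl (buildStep k l) S).2.1.length = S.2.1.length ∧
     (rows.foldl (buildStep k l) S).2.2.length = S.2.2.length) := by
  induction rows with
  | nil => intro S; exact ⟨rfl, rfl, rfl⟩
  | cons r rows ih =>
    intro S
    simp only [List.foldl_cons]
    have h2 := ih (buildStep k l S r)
    have hb : (buildStep k l S r).1.length = S.1.length ∧
        (buildStep k l S r).2.1.length = S.2.1.length ∧
        (buildStep k l S r).2.2.length = S.2.2.length := by
      simp only [buildStep]
      split <;> exact ⟨by simp [PySem.List.length_pySetD], by simp [PySem.List.length_pySetD],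
        by simp [PySem.List.length_pySetD]⟩
    exact ⟨h2.1.trans hb.1, h2.2.1.trans hb.2.1, h2.2.2.trans hb.2.2⟩

theorem build_chunks (k : Int) (l : List Int) (regs : List (List Int)) (ts : List Int) :
    ∀ (S : List (List Int) × List (List (Int × Int)) × List Int),
    (∀ t ∈ ts, 1 ≤ t) →
    (∀ t ∈ ts, t.toNat < S.1.length ∧ t.toNat < S.2.1.length ∧ t.toNat < S.2.2.length) →
    ts.Pairwise (· ≠ ·) →
    ∀ j : Int, 0 ≤ j →
    j.toNat < S.1.length → j.toNat < S.2.1.length → j.toNat < S.2.2.length →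
    (PySem.List.pyGetD ((ts.flatMap (fun t => grpRows regs t)).foldl (buildStep k l) S).1 j [],
     PySem.List.pyGetD ((ts.flatMap (fun t => grpRows regs t)).foldl (buildStep k l) S).2.1 j [],
     PySem.List.pyGetD ((ts.flatMap (fun t => grpRows regs t)).foldl (buildStep k l) S).2.2 j 0) =
      (if j ∈ ts then
        (grpRows regs j).foldl (local1 (PySem.List.pyGetD l (j - 1) 0))
          (PySem.List.pyGetD S.1 j [], PySem.List.pyGetD S.2.1 j [], PySem.List.pyGetD S.2.2 j 0)
      else (PySem.List.pyGetD S.1 j [], PySem.List.pyGetD S.2.1 j [], PySem.List.pyGetD S.2.2 j 0)) := by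
  induction ts with
  | nil =>
    intro S _ _ _ j _ _ _ _
    simp
  | cons t ts ih =>
    intro S h1 hlen hnd j hj hb1 hb2 hb3
    have ht1 : 1 ≤ t := h1 t (by simp)
    have htS := hlen t (by simp)
    have hblock := build_block k l t (grpRows regs t) (fun y hy => mem_grpRows regs t y hy)
      (by omega) S htS.1 htS.2.1 htS.2.2
    rw [List.flatMap_cons, List.foldl_append, hblock]
    set R := (grpRows regs t).foldl (local1 (PySem.List.pyGetD l (t - 1) 0))
        (PySem.List.pyGetD S.1 t [], PySem.List.pyGetD S.2.1 t [], PySem.List.pyGetD S.2.2 t 0)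
      with hR
    have hlen' : ∀ u ∈ ts,
        u.toNat < (PySem.List.pySetD S.1 t R.1).length ∧
        u.toNat < (PySem.List.pySetD S.2.1 t R.2.1).length ∧
        u.toNat < (PySem.List.pySetD S.2.2 t R.2.2).length := by
      intro u hu
      have := hlen u (by simp [hu])
      simpa [PySem.List.length_pySetD] using this
    have hnotmem : t ∉ ts := by
      intro hmem
      exact (List.pairwise_cons.mp hnd).1 t hmem rfl
    rw [ih (PySem.List.pySetD S.1 t R.1, PySem.List.pySetD S.2.1 t R.2.1, PySem.List.pySetD S.2.2 t R.2.2)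
      (fun u hu => h1 u (by simp [hu])) hlen' (List.pairwise_cons.mp hnd).2 j hj
      (by simpa [PySem.List.length_pySetD]) (by simpa [PySem.List.length_pySetD])
      (by simpa [PySem.List.length_pySetD])]
    by_cases hjt : j = t
    · subst hjt
      rw [if_neg hnotmem, if_pos (by simp)]
      simp only
      rw [pyGetD_pySetD_self _ _ _ _ hj (by omega),
        pyGetD_pySetD_self _ _ _ _ hj (by omega),
        pyGetD_pySetD_self _ _ _ _ hj (by omega)]
    · have e1 := pyGetD_pySetD_ne S.1 t j [] R.1 (by omega) hj hjt hb1
      have e2 := pyGetD_pySetD_ne S.2.1 t j [] R.2.1 (by omega) hj hjt hb2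
      have e3 := pyGetD_pySetD_ne S.2.2 t j 0 R.2.2 (by omega) hj hjt hb3
      by_cases hjts : j ∈ ts
      · rw [if_pos hjts, if_pos (by simp [hjts]), e1, e2, e3]
      · rw [if_neg hjts, if_neg (by simp [hjt, hjts]), e1, e2, e3]

def bstep (st : List Int × Int) (p : Int × Int) : List Int × Int :=
  let e := ((PySem.List.min? st.1 (fun x => x)).getD 0)
  let i := ((PySem.List.index? st.1 e).getD 0)
  if p.1 < e then (st.1.set i (e + p.2), st.2 + e - p.1)
  else (st.1.set i (p.1 + p.2), st.2)

theorem costB_eq (rs : List (Int × Int)) (m : Int) (hm : 0 ≤ m) :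
    costB rs m = ((PySem.List.sorted2 (rs.drop m.toNat) Prod.fst Prod.snd false).foldl bstep
      ((rs.take m.toNat).map (fun p => p.1 + p.2), 0)).2 := by
  unfold costB
  rw [PySem.List.slice_to _ hm, PySem.List.slice_from _ hm]
  rfl

theorem popLoop_eq (ys : List (Int × Int)) :
    ∀ (heap busy : List Int) (w : Int),
    heap.Perm busy → heap.Pairwise (· ≤ ·) → (ys ≠ [] → busy ≠ []) →
    popLoop heap ys.reverse w = (ys.foldl bstep (busy, w)).2 := by
  induction ys with
  | nil =>
    intro heap busy w hperm hsort _
    cases heap with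
    | nil => simp [popLoop]
    | cons e hs => simp [popLoop]
  | cons p ys ih =>
    intro heap busy w hperm hsort hne
    have hbusy : busy ≠ [] := hne (by simp)
    have hheap : heap ≠ [] := by
      intro h
      apply hbusy
      have := hperm.length_eq
      rw [h] at this
      exact List.length_eq_zero_iff.mp this.symm
    obtain ⟨e, hs, rfl⟩ := List.exists_cons_of_ne_nil hheap
    have he_mem : e ∈ busy := hperm.mem_iff.mp (by simp)
    have he_min : ∀ y ∈ busy, e ≤ y := by
      intro y hy
      rcases List.mem_cons.mp (hperm.mem_iff.mpr hy) with rfl | hy'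
      · exact le_refl _
      · exact (List.pairwise_cons.mp hsort).1 y hy'
    have hminEq : PySem.List.min? busy (fun x => x) = some e := by
      cases hmin : PySem.List.min? busy (fun x => x) with
      | none => exact absurd ((PySem.List.min?_eq_none_iff busy _).mp hmin) hbusy
      | some u =>
        have hu_mem := PySem.List.min?_mem hmin
        have hu_min := PySem.List.min?_isMin hmin
        have : u = e := le_antisymm (hu_min e he_mem) (he_min u hu_mem)
        rw [this]
    have hidx : ∃ i, PySem.List.index? busy e = some i :=
      Option.isSome_iff_exists.mp ((PySem.List.index?_isSome_iff busy e).mpr he_mem)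
    obtain ⟨i, hi⟩ := hidx
    obtain ⟨pre, suf, hbusy_eq, hlen_pre, _⟩ := (PySem.List.index?_eq_some_iff busy e i).mp hi
    have hset : ∀ v : Int, busy.set i v = pre ++ v :: suf := by
      intro v
      rw [hbusy_eq, List.set_append, if_neg (by omega)]
      have : i - pre.length = 0 := by omega
      rw [this, List.set_cons_zero]
    have hs_perm : hs.Perm (pre ++ suf) := by
      have h1 : (e :: hs).Perm (e :: (pre ++ suf)) := by
        rw [hbusy_eq] at hperm
        exact hperm.trans List.perm_middle
      exact h1.cons_inv
    have hnewperm : ∀ v : Int, (heapPush hs v).Perm (busy.set i v) := by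
      intro v
      rw [hset v]
      exact ((insertBy_perm _ v hs).trans (hs_perm.cons v)).trans List.perm_middle.symm
    have hnewsort : ∀ v : Int, (heapPush hs v).Pairwise (· ≤ ·) :=
      fun v => heapPush_pairwise hs v (List.pairwise_cons.mp hsort).2
    have hnewne : ∀ v : Int, (ys ≠ [] → busy.set i v ≠ []) := by
      intro v _ hcontra
      rw [hset v] at hcontra
      exact absurd hcontra (by simp)
    have hrev : (p :: ys).reverse = ys.reverse ++ [p] := by simp
    rw [hrev]
    have hcs : ys.reverse ++ [p] ≠ [] := by simp
    simp only [popLoop, dif_neg hcs]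
    rw [List.getLast_concat, List.dropLast_concat]
    simp only [List.foldl_cons]
    have hbstep : bstep (busy, w) p =
        (if p.1 < e then (busy.set i (e + p.2), w + e - p.1) else (busy.set i (p.1 + p.2), w)) := by
      simp only [bstep, hminEq, Option.getD_some, hi]
    by_cases hplt : p.1 < e
    · rw [if_pos hplt, hbstep, if_pos hplt]
      exact ih _ _ _ (hnewperm _) (hnewsort _) (hnewne _)
    · rw [if_neg hplt, hbstep, if_neg hplt]
      exact ih _ _ _ (hnewperm _) (hnewsort _) (hnewne _)

def valT (reqs : List (List Int)) (t m : Int) : Int := costB (groupB reqs t) m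

theorem heapFold_length (xs : List Int) (H : List Int) :
    (xs.foldl heapPush H).length = H.length + xs.length := by
  have := (heapFold_perm xs H).length_eq
  simpa using this

theorem popLoop_shift (cs : List (Int × Int)) : ∀ (heap : List Int) (w : Int),
    popLoop heap cs w = w + popLoop heap cs 0 := by
  induction cs using List.reverseRecOn with
  | nil =>
    intro heap w
    cases heap with
    | nil => simp [popLoop]
    | cons e hs => simp [popLoop]
  | append_singleton xs p ih =>
    intro heap w
    cases heap with
    | nil => simp [popLoop]
    | cons e hs =>
      have hcs : xs ++ [p] ≠ [] := by simp
      simp only [popLoop, dif_neg hcs]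
      rw [List.getLast_concat, List.dropLast_concat]
      by_cases hplt : p.1 < e
      · rw [if_pos hplt, if_pos hplt, ih, ih (heapPush hs (e + p.2)) (0 + e - p.1)]
        ring
      · rw [if_neg hplt, if_neg hplt, ih]

theorem type_val_eq (reqs : List (List Int)) (t m : Int) (hm : 0 ≤ m)
    (hgood : ¬ (m = 0 ∧ grpRows reqs t ≠ [])) :
    popLoop ((((grpRows reqs t).take m.toNat).map (fun r => rowA' r + rowB' r)).foldl heapPush [])
        (PySem.List.sorted2 (((grpRows reqs t).drop m.toNat).map rowP') Prod.fst Prod.snd true) 0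
      = valT reqs t m := by
  by_cases hm0 : m = 0
  · have hgrp : grpRows reqs t = [] := by
      by_contra hne
      exact hgood ⟨hm0, hne⟩
    subst hm0
    rw [hgrp]
    simp only [List.take_nil, List.drop_nil, List.map_nil, List.foldl_nil]
    have h1 : PySem.List.sorted2 ([] : List (Int × Int)) Prod.fst Prod.snd true = [] := rfl
    rw [h1]
    simp only [popLoop]
    unfold valT
    rw [groupB_eq, hgrp]
    rfl
  · unfold valT
    rw [groupB_eq, costB_eq _ _ hm]
    rw [← List.map_take, ← List.map_drop, List.map_map]
    have hbusy_eq : ((grpRows reqs t).take m.toNat).map ((fun p : Int × Int => p.1 + p.2) ∘ rowP') =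
        ((grpRows reqs t).take m.toNat).map (fun r => rowA' r + rowB' r) := rfl
    rw [hbusy_eq]
    set xs := ((grpRows reqs t).drop m.toNat).map rowP' with hxs
    set E := ((grpRows reqs t).take m.toNat).map (fun r => rowA' r + rowB' r) with hE
    have hdesc : PySem.List.sorted2 xs Prod.fst Prod.snd true =
        (PySem.List.sorted2 xs Prod.fst Prod.snd false).reverse := by
      rw [← sorted2_desc_reverse, List.reverse_reverse]
    rw [hdesc]
    apply popLoop_eq
    · exact heapFold_perm E []
    · exact heapFold_pairwise E [] (by simp)
    · intro hys
      have hxs_ne : xs ≠ [] := by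
        intro hnil
        apply hys
        rw [hnil]
        rfl
      have hdrop : (grpRows reqs t).length > m.toNat := by
        by_contra hle
        apply hxs_ne
        rw [hxs, List.drop_eq_nil_iff.mpr (by omega), List.map_nil]
      intro hEnil
      have hlenE : E.length = min m.toNat (grpRows reqs t).length := by
        rw [hE]; simp [List.length_take]
      rw [hEnil] at hlenE
      simp only [List.length_nil] at hlenE
      omega

theorem simulateA_eq (k n : Int) (reqs : List (List Int)) (l : List Int)
    (hk : 1 ≤ k)
    (hc : ∀ r ∈ reqs, r.length = 3 ∧ 1 ≤ rowC' r ∧ rowC' r ≤ k)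
    (hl : ∀ t, 1 ≤ t → t ≤ k → 0 ≤ PySem.List.pyGetD l (t - 1) 0) :
    simulateA k n reqs l =
      if ∃ t ∈ PySem.List.pyRange 1 (k + 1) 1, PySem.List.pyGetD l (t - 1) 0 = 0 ∧ grpRows reqs t ≠ [] then 10 ^ 18
      else (PySem.List.pyRange 1 (k + 1) 1).foldl
        (fun w t => w + valT reqs t (PySem.List.pyGetD l (t - 1) 0)) 0 := by
  have hcrow : ∀ r ∈ reqs, 1 ≤ rowC' r ∧ rowC' r ≤ k := fun r hr => ⟨(hc r hr).2.1, (hc r hr).2.2⟩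
  unfold simulateA
  simp only
  rw [sorted2_blocks k reqs hcrow]
  set sz := (k + 1).toNat with hsz
  set ts := PySem.List.pyRange 1 (k + 1) 1 with hts
  set S0 : List (List Int) × List (List (Int × Int)) × List Int :=
    (List.replicate sz [], List.replicate sz [], List.replicate sz 0) with hS0
  set st := (ts.flatMap (fun t => grpRows reqs t)).foldl (buildStep k l) S0 with hst
  have hmemts : ∀ t, t ∈ ts ↔ 1 ≤ t ∧ t ≤ k := by
    intro t
    rw [hts, PySem.List.mem_pyRange_one]
    omega
  have hL := build_lengths k l (ts.flatMap (fun t => grpRows reqs t)) S0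
  have hlen1 : st.1.length = sz := by rw [hst, hL.1]; simp [hS0]
  have hlen2 : st.2.1.length = sz := by rw [hst, hL.2.1]; simp [hS0]
  have hlen3 : st.2.2.length = sz := by rw [hst, hL.2.2]; simp [hS0]
  have hinit1 : ∀ j : Int, 0 ≤ j → PySem.List.pyGetD S0.1 j [] = [] := by
    intro j hj
    by_cases hjb : j.toNat < sz
    · rw [PySem.List.pyGetD_eq_getElem _ _ hj (by simp [hS0]; omega)]
      simp [hS0]
    · rw [PySem.List.pyGetD_of_none]
      rw [PySem.List.pyGet?_eq_none_iff]
      simp [hS0, PySem.Raise.InRange]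
      omega
  have hinit2 : ∀ j : Int, 0 ≤ j → j.toNat < sz → PySem.List.pyGetD S0.2.1 j [] = [] := by
    intro j hj hjb
    rw [PySem.List.pyGetD_eq_getElem _ _ hj (by simp [hS0]; omega)]
    simp [hS0]
  have hinit3 : ∀ j : Int, 0 ≤ j → j.toNat < sz → PySem.List.pyGetD S0.2.2 j 0 = 0 := by
    intro j hj hjb
    rw [PySem.List.pyGetD_eq_getElem _ _ hj (by simp [hS0]; omega)]
    simp [hS0]
  have hchunks := build_chunks k l reqs ts S0
    (fun t ht => ((hmemts t).mp ht).1)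
    (fun t ht => by
      have := (hmemts t).mp ht
      refine ⟨?_, ?_, ?_⟩ <;> simp [hS0] <;> omega)
    (by rw [hts]; simpa [List.Nodup] using PySem.List.nodup_pyRange_one 1 (k + 1))
  have hcomp : ∀ j, 1 ≤ j → j ≤ k →
      PySem.List.pyGetD st.1 j [] =
        (((grpRows reqs j).take (PySem.List.pyGetD l (j - 1) 0).toNat).map
          (fun r => rowA' r + rowB' r)).foldl heapPush [] ∧
      PySem.List.pyGetD st.2.1 j [] =
        ((grpRows reqs j).drop (PySem.List.pyGetD l (j - 1) 0).toNat).map rowP' ∧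
      PySem.List.pyGetD st.2.2 j 0 = ((grpRows reqs j).length : Int) := by
    intro j h1 h2
    have hj0 : (0 : Int) ≤ j := by omega
    have hjb : j.toNat < sz := by omega
    have h := hchunks j hj0 (by simp [hS0]; omega) (by simp [hS0]; omega) (by simp [hS0]; omega)
    rw [if_pos ((hmemts j).mpr ⟨h1, h2⟩), hinit1 j hj0, hinit2 j hj0 hjb, hinit3 j hj0 hjb,
      local1_char _ (hl j h1 h2) _ [] [] 0 (by simp)] at h
    simp only [List.length_nil, Nat.sub_zero, List.nil_append, zero_add, Prod.mk.injEq] at h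
    exact ⟨h.1, h.2.1, h.2.2⟩
  have hrange_eq : PySem.List.pyRange 1 (st.1.length : Int) 1 = ts := by
    rw [hts]
    congr 1
    rw [hlen1, hsz]
    omega
  rw [hrange_eq]
  by_cases hbad : ∃ t ∈ ts, PySem.List.pyGetD l (t - 1) 0 = 0 ∧ grpRows reqs t ≠ []
  · rw [if_pos hbad]
    obtain ⟨t, htmem, hm0, hgne⟩ := hbad
    have ht := (hmemts t).mp htmem
    have hcompt := hcomp t ht.1 ht.2
    have hheap_nil : PySem.List.pyGetD st.1 t [] = [] := by
      rw [hcompt.1, hm0]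
      simp
    have hcnt_ne : PySem.List.pyGetD st.2.2 t 0 ≠ 0 := by
      rw [hcompt.2.2]
      simp only [ne_eq, Int.natCast_eq_zero, List.length_eq_zero_iff]
      exact hgne
    rw [if_pos (by
      rw [List.any_eq_true]
      exact ⟨t, htmem, by simp [hheap_nil, hcnt_ne]⟩)]
  · rw [if_neg hbad]
    have hany : ((ts.any fun i => decide (PySem.List.pyGetD st.1 i [] = []) &&
        decide (PySem.List.pyGetD st.2.2 i 0 ≠ 0)) = false) := by
      rw [List.any_eq_false]
      intro i hi
      have hii := (hmemts i).mp hi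
      have hcompi := hcomp i hii.1 hii.2
      simp only [Bool.and_eq_true, decide_eq_true_eq, ne_eq, not_and, not_not]
      intro hnil
      by_cases hgi : grpRows reqs i = []
      · rw [hcompi.2.2, hgi]
        rfl
      · exfalso
        rw [hcompi.1] at hnil
        have hlenE := heapFold_length (((grpRows reqs i).take
          (PySem.List.pyGetD l (i - 1) 0).toNat).map (fun r => rowA' r + rowB' r)) []
        rw [hnil] at hlenE
        simp only [List.length_nil, List.length_map, List.length_take] at hlenE
        have hgl : 0 < (grpRows reqs i).length := List.length_pos_of_ne_nil hgi
        have hm0 : (PySem.List.pyGetD l (i - 1) 0).toNat = 0 := by omega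
        have hm00 : PySem.List.pyGetD l (i - 1) 0 = 0 := by
          have := hl i hii.1 hii.2
          omega
        exact hbad ⟨i, hi, hm00, hgi⟩
    rw [if_neg (by rw [hany]; exact Bool.false_ne_true)]
    apply PySem.List.foldl_congr_mem
    intro acc i hi
    have hii := (hmemts i).mp hi
    have hcompi := hcomp i hii.1 hii.2
    have hmap : PySem.List.pyGetD (st.2.1.map
        (fun cs => PySem.List.sorted2 cs Prod.fst Prod.snd true)) i [] =
        PySem.List.sorted2 (PySem.List.pyGetD st.2.1 i []) Prod.fst Prod.snd true :=
      PySem.List.pyGetD_map (fun cs => PySem.List.sorted2 cs Prod.fst Prod.snd true) st.2.1 i []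
    rw [hmap, hcompi.1, hcompi.2.1, popLoop_shift]
    congr 1
    apply type_val_eq reqs i _ (hl i hii.1 hii.2)
    intro ⟨hm0, hgne⟩
    exact hbad ⟨i, hi, hm0, hgne⟩

-- ---------- A-side candidate set ----------

-- shape of a partition suffix produced by partition_helper
def PartShape : Int → Int → List Int → Prop
  | _, _, [] => False
  | last, n, [p] => last ≤ p ∧ p = n
  | last, n, p :: q => last ≤ p ∧ 1 ≤ p ∧ p < n ∧ PartShape p (n - p) q

theorem shape_sum : ∀ (q : List Int) (last n : Int), PartShape last n q → q.sum = n := by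
  intro q
  induction q with
  | nil => intro last n h; exact absurd h (by simp [PartShape])
  | cons p q ih =>
    intro last n h
    cases q with
    | nil => simp [PartShape] at h; simp [h.2]
    | cons p2 q2 =>
      simp only [PartShape] at h
      have := ih p (n - p) h.2.2.2
      simp only [List.sum_cons] at *
      omega

theorem shape_all_pos : ∀ (q : List Int) (last n : Int), 1 ≤ n → 0 ≤ last →
    PartShape last n q → ∀ p ∈ q, 1 ≤ p := by
  intro q
  induction q with
  | nil => intro last n _ _ h; exact absurd h (by simp [PartShape])
  | cons p q ih =>
    intro last n hn hlast h y hy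
    cases q with
    | nil =>
      simp only [PartShape] at h
      rcases List.mem_singleton.mp hy with rfl
      omega
    | cons p2 q2 =>
      simp only [PartShape] at h
      rcases List.mem_cons.mp hy with rfl | hy'
      · exact h.2.1
      · exact ih p (n - p) (by omega) (by omega) h.2.2.2 y hy'

theorem shape_of_sorted : ∀ (q : List Int) (last : Int), q ≠ [] → (∀ p ∈ q, 1 ≤ p) →
    List.IsChain (· ≤ ·) (last :: q) → PartShape last q.sum q := by
  intro q
  induction q with
  | nil => intro last h; exact absurd rfl h
  | cons p q ih =>
    intro last _ hpos hchain
    cases q with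
    | nil =>
      simp only [PartShape, List.sum_cons, List.sum_nil]
      exact ⟨(List.isChain_cons_cons.mp hchain).1, by ring⟩
    | cons p2 q2 =>
      simp only [PartShape]
      have hch := List.isChain_cons_cons.mp hchain
      have hsum : 1 ≤ p2 + q2.sum := by
        have h2 : (1 : Int) ≤ p2 := hpos p2 (by simp)
        have h0 : (0 : Int) ≤ q2.sum :=
          List.sum_nonneg (fun x hx => by have := hpos x (by simp [hx]); omega)
        omega
      refine ⟨hch.1, hpos p (by simp), ?_, ?_⟩
      · simp only [List.sum_cons]; omega
      · have heq : (p :: p2 :: q2).sum - p = (p2 :: q2).sum := by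
          simp only [List.sum_cons]; ring
        rw [heq]
        exact ih p (by simp) (fun x hx => hpos x (by simp [hx])) hch.2

theorem partitionHelper_nonpos : ∀ (N : Nat) (n k : Int) (cur : List Int),
    n.toNat ≤ N → k ≤ 0 → partitionHelper n k cur = [] := by
  intro N
  induction N with
  | zero =>
    intro n k cur hN hk
    unfold partitionHelper
    rw [if_neg (by omega)]
    rw [List.flatMap_eq_nil_iff]
    intro x _
    have := PySem.List.mem_pyRange_one.mp x.2
    omega
  | succ N ihN =>
    intro n k cur hN hk
    unfold partitionHelper
    rw [if_neg (by omega)]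
    rw [List.flatMap_eq_nil_iff]
    intro x _
    have hx := PySem.List.mem_pyRange_one.mp x.2
    split
    · exact ihN (n - x.1) (k - 1) (cur ++ [x.1]) (by omega) (by omega)
    · rfl

theorem partitionHelper_mem : ∀ (K : Nat) (n k : Int) (cur : List Int) (x : List Int),
    k.toNat = K → 1 ≤ k →
    (x ∈ partitionHelper n k cur ↔
      ∃ q : List Int, x = cur ++ q ∧ q.length = k.toNat ∧
        PartShape (PySem.List.pyGetD cur (-1) 0) n q) := by
  intro K
  induction K with
  | zero => intro n k cur x hK hk; omega
  | succ K ihK =>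
    intro n k cur x hK hk
    by_cases hk1 : k = 1
    · subst hk1
      unfold partitionHelper
      rw [if_pos rfl]
      constructor
      · intro hx
        by_cases hcond : n ≥ PySem.List.pyGetD cur (-1) 0
        · rw [if_pos hcond] at hx
          rcases List.mem_singleton.mp hx with rfl
          exact ⟨[n], rfl, rfl, hcond, rfl⟩
        · rw [if_neg hcond] at hx
          cases hx
      · rintro ⟨q, rfl, hlen, hshape⟩
        cases q with
        | nil => simp at hlen
        | cons p q2 =>
          cases q2 with
          | nil =>
            simp only [PartShape] at hshape
            rw [if_pos (by omega), hshape.2]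
            exact List.mem_singleton.mpr rfl
          | cons p2 q3 => simp at hlen
    · have hk2 : 2 ≤ k := by omega
      unfold partitionHelper
      rw [if_neg hk1, List.mem_flatMap]
      constructor
      · rintro ⟨⟨i, hi⟩, _, hxi⟩
        have hib := PySem.List.mem_pyRange_one.mp hi
        by_cases hcond : i ≥ PySem.List.pyGetD cur (-1) 0
        · rw [if_pos hcond] at hxi
          obtain ⟨q', hq'eq, hq'len, hq'shape⟩ :=
            (ihK (n - i) (k - 1) (cur ++ [i]) x (by omega) (by omega)).mp hxi
          rw [PySem.List.pyGetD_neg_one_append_singleton] at hq'shape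
          refine ⟨i :: q', by rw [hq'eq, List.append_assoc]; rfl, by simp; omega, ?_⟩
          cases q' with
          | nil => simp at hq'len; omega
          | cons p2 q3 =>
            simp only [PartShape]
            exact ⟨hcond, by omega, by omega, hq'shape⟩
        · rw [if_neg hcond] at hxi
          cases hxi
      · rintro ⟨q, rfl, hlen, hshape⟩
        cases q with
        | nil => simp at hlen; omega
        | cons i q' =>
          have hq'ne : q' ≠ [] := by
            intro hnil
            rw [hnil] at hlen
            simp at hlen
            omega
          obtain ⟨p2, q3, rfl⟩ := List.exists_cons_of_ne_nil hq'ne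
          simp only [PartShape] at hshape
          obtain ⟨hs1, hs2, hs3, hs4⟩ := hshape
          refine ⟨⟨i, PySem.List.mem_pyRange_one.mpr ⟨by omega, by omega⟩⟩, List.mem_attach _ _, ?_⟩
          rw [if_pos (by omega)]
          refine (ihK (n - i) (k - 1) (cur ++ [i]) _ (by omega) (by omega)).mpr ?_
          refine ⟨p2 :: q3, by rw [List.append_assoc]; rfl, by simp at hlen ⊢; omega, ?_⟩
          rw [PySem.List.pyGetD_neg_one_append_singleton]
          exact hs4

theorem partitionA_nil (n k : Int) (h : ¬ (1 ≤ k ∧ k ≤ n)) : partitionA n k = [] := by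
  unfold partitionA
  by_cases hnk : n < k
  · rw [if_pos hnk]
  · rw [if_neg hnk]
    exact partitionHelper_nonpos n.toNat n k [0] (le_refl _) (by omega)

theorem partitionA_mem (n k : Int) (hk : 1 ≤ k) (hn : k ≤ n) (x : List Int) :
    x ∈ partitionA n k ↔ ∃ q, x = 0 :: q ∧ q.length = k.toNat ∧ PartShape 0 n q := by
  unfold partitionA
  rw [if_neg (by omega)]
  have h := partitionHelper_mem k.toNat n k [0] x rfl hk
  have h0 : PySem.List.pyGetD [(0 : Int)] (-1) 0 = 0 := by decide
  rw [h0] at h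
  simpa using h

theorem mem_permutations_of_perm : ∀ (L xs : List Int), L.Perm xs →
    L ∈ PySem.List.permutations xs xs.length := by
  intro L
  induction L with
  | nil =>
    intro xs hp
    have : xs = [] := hp.nil_eq.symm
    subst this
    simp [PySem.List.permutations]
  | cons y L' ih =>
    intro xs hp
    have hy : y ∈ xs := hp.mem_iff.mp (by simp)
    have hlen : xs.length = L'.length + 1 := by
      rw [← hp.length_eq]
      rfl
    have hidx : xs.idxOf y < xs.length := List.idxOf_lt_length_of_mem hy
    have hget : xs[xs.idxOf y] = y := List.getElem_idxOf hidx
    have herase : xs.erase y = xs.eraseIdx (xs.idxOf y) := List.erase_eq_eraseIdx_of_idxOf rfl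
    have hperm' : L'.Perm (xs.eraseIdx (xs.idxOf y)) := by
      rw [← herase]
      have h1 : xs.Perm (y :: xs.erase y) := List.perm_cons_erase hy
      exact (hp.trans h1).cons_inv
    have hlen' : (xs.eraseIdx (xs.idxOf y)).length = L'.length := by
      rw [List.length_eraseIdx, if_pos hidx]
      omega
    rw [hlen]
    simp only [PySem.List.permutations, List.mem_flatMap]
    refine ⟨xs.idxOf y, List.mem_range.mpr hidx, ?_⟩
    rw [List.getElem?_eq_getElem hidx, hget]
    refine List.mem_map.mpr ⟨L', ?_, rfl⟩
    rw [← hlen']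
    exact ih _ hperm'

theorem mem_setfold (ret : List (List Int)) (L : List Int) :
    ∀ s0 : PySem.Set (List Int),
    (L ∈ ret.foldl (fun s i => (PySem.List.permutations i i.length).foldl (fun s j => s.add j) s) s0 ↔
      L ∈ s0 ∨ ∃ p ∈ ret, L ∈ PySem.List.permutations p p.length) := by
  induction ret with
  | nil => intro s0; simp
  | cons p ret ih =>
    intro s0
    simp only [List.foldl_cons]
    rw [ih]
    rw [show ((PySem.List.permutations p p.length).foldl (fun s j => s.add j) s0) =
      ((PySem.List.permutations p p.length).foldl (fun s j => s.add ((fun x => x) j)) s0) from rfl]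
    rw [PySem.Set.mem_foldl_add]
    constructor
    · rintro ((h | ⟨b, hb, rfl⟩) | h)
      · exact Or.inl h
      · exact Or.inr ⟨p, by simp, hb⟩
      · rcases h with ⟨p', hp', hLp'⟩
        exact Or.inr ⟨p', by simp [hp'], hLp'⟩
    · rintro (h | ⟨p', hp', hLp'⟩)
      · exact Or.inl (Or.inl h)
      · rcases List.mem_cons.mp hp' with rfl | hp''
        · exact Or.inl (Or.inr ⟨L, hLp', rfl⟩)
        · exact Or.inr ⟨p', hp'', hLp'⟩

theorem mem_setL (k n : Int) (hk : 1 ≤ k) (hn : k ≤ n) (L : List Int) :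
    (L ∈ (partitionA n k).foldl
        (fun s i => (PySem.List.permutations i i.length).foldl (fun s j => s.add j) s)
        (PySem.Set.ofList [])) ↔
      (L.length = k.toNat + 1 ∧ L.count 0 = 1 ∧ (∀ y ∈ L, y = 0 ∨ 1 ≤ y) ∧ L.sum = n) := by
  rw [mem_setfold]
  constructor
  · rintro (h | ⟨p, hpret, hLp⟩)
    · exact absurd ((PySem.Set.mem_ofList [] L).mp h) (by simp)
    · obtain ⟨q, rfl, hqlen, hqshape⟩ := (partitionA_mem n k hk hn p).mp hpret
      have hperm : L.Perm (0 :: q) := PySem.List.perm_of_mem_permutations hLp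
      have hsum := shape_sum q 0 n hqshape
      have hpos := shape_all_pos q 0 n (by omega) (le_refl 0) hqshape
      have hzero_q : (0 : Int) ∉ q := fun hmem => by have := hpos 0 hmem; omega
      refine ⟨?_, ?_, ?_, ?_⟩
      · rw [hperm.length_eq]
        simp [hqlen]
      · rw [hperm.count_eq]
        simp only [List.count_cons, if_pos rfl]
        rw [List.count_eq_zero.mpr hzero_q]
        simp
      · intro y hy
        rcases List.mem_cons.mp (hperm.mem_iff.mp hy) with rfl | hyq
        · exact Or.inl rfl
        · exact Or.inr (hpos y hyq)
      · rw [hperm.sum_eq]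
        simp [hsum]
  · rintro ⟨hlen, hcount, hall, hsum⟩
    right
    have hmem0 : (0 : Int) ∈ L := List.count_pos_iff.mp (by omega)
    have hLperm : L.Perm (0 :: L.erase 0) := List.perm_cons_erase hmem0
    have hzero_e : (0 : Int) ∉ L.erase 0 := by
      intro hmem
      have h1 : 0 < List.count (0 : Int) (L.erase 0) := List.count_pos_iff.mpr hmem
      have h2 : List.count (0 : Int) (L.erase 0) = List.count (0 : Int) L - 1 :=
        List.count_erase_self
      omega
    have hqperm : (((L.erase 0).mergeSort (fun a b => decide (a ≤ b)))).Perm (L.erase 0) :=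
      List.mergeSort_perm (L.erase 0) _
    set q := (L.erase 0).mergeSort (fun a b => decide (a ≤ b)) with hq
    have hpq : ∀ y ∈ q, (1 : Int) ≤ y := by
      intro y hy
      have hyL : y ∈ L := (List.erase_subset).trans (fun _ h => h) (hqperm.mem_iff.mp hy)
      rcases hall y hyL with rfl | h1
      · exact absurd (hqperm.mem_iff.mp hy) hzero_e
      · exact h1
    have hqpw : q.Pairwise (· ≤ ·) := by
      have := List.sorted_mergeSort (le := fun a b : Int => decide (a ≤ b))
        (fun a b c h1 h2 => by simp at *; omega)
        (fun a b => by simp; omega) (L.erase 0)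
      rw [← hq] at this
      exact this.imp (fun h => by simpa using h)
    have hlene : (L.erase 0).length = L.length - 1 := by
      rw [List.length_erase, if_pos hmem0]
    have hqlen : q.length = k.toNat := by
      rw [hqperm.length_eq, hlene, hlen]
      omega
    have hqne : q ≠ [] := by
      intro hnil
      rw [hnil] at hqlen
      simp at hqlen
      omega
    have hqsum : q.sum = n := by
      rw [hqperm.sum_eq]
      have := hLperm.sum_eq
      simp only [List.sum_cons, zero_add] at this
      omega
    have hchain : List.IsChain (· ≤ ·) (0 :: q) := by
      apply List.isChain_iff_pairwise.mpr
      refine List.pairwise_cons.mpr ⟨fun y hy => by have := hpq y hy; omega, hqpw⟩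
    have hshape : PartShape 0 n q := by
      have := shape_of_sorted q 0 hqne hpq hchain
      rwa [hqsum] at this
    refine ⟨0 :: q, (partitionA_mem n k hk hn _).mpr ⟨q, rfl, hqlen, hshape⟩, ?_⟩
    exact mem_permutations_of_perm L (0 :: q) (hLperm.trans ((hqperm.symm).cons 0))

-- ---------- B-side Bellman ----------

-- extra counselors a requested type can use beyond its first one
def capI (reqs : List (List Int)) (t : Int) : Int := ((grpRows reqs t).length : Int) - 1

-- total cost of an extras vector es aligned with the type list rts
def sumW (reqs : List (List Int)) (rts es : List Int) : Int :=
  (List.zipWith (fun t e => valT reqs t (e + 1)) rts es).sum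

-- a valid extras vector: componentwise within [0, cap]
def EOkB (reqs : List (List Int)) (rts es : List Int) : Prop :=
  List.Forall₂ (fun e t => 0 ≤ e ∧ e ≤ capI reqs t) es rts

-- some component sits exactly at its cap (a saturated type)
def SatW (reqs : List (List Int)) : List Int → List Int → Prop
  | t :: ts, e :: es => e = capI reqs t ∨ SatW reqs ts es
  | _, _ => False

def valsF (reqs : List (List Int)) : List Int → Int → List Int
  | [], b => if b = 0 then [0] else []
  | t :: ts, b => (PySem.List.pyRange 0 (min b (capI reqs t) + 1) 1).flatMap
      (fun e => (valsF reqs ts (b - e)).map (· + valT reqs t (e + 1)))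

def valsG (reqs : List (List Int)) : List Int → Int → List Int
  | [], _ => []
  | t :: ts, b =>
    ((PySem.List.pyRange 0 (min b (capI reqs t) + 1) 1).flatMap
      (fun e => (valsG reqs ts (b - e)).map (· + valT reqs t (e + 1)))) ++
    (if b ≥ capI reqs t then
      (valsF reqs ts (b - capI reqs t)).map (· + valT reqs t (capI reqs t + 1)) else [])

theorem eok_nonneg (reqs : List (List Int)) : ∀ (rts es : List Int),
    EOkB reqs rts es → 0 ≤ es.sum := by
  intro rts es h
  apply List.sum_nonneg
  intro x hx
  induction h with
  | nil => simp at hx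
  | cons hp _ ih =>
    rcases List.mem_cons.mp hx with rfl | hx'
    · exact hp.1
    · exact ih hx'

theorem mem_valsF (reqs : List (List Int)) : ∀ (rts : List Int) (b v : Int),
    (v ∈ valsF reqs rts b ↔
      ∃ es, EOkB reqs rts es ∧ es.sum = b ∧ v = sumW reqs rts es) := by
  intro rts
  induction rts with
  | nil =>
    intro b v
    simp only [valsF]
    constructor
    · intro hv
      split at hv
      · rcases List.mem_singleton.mp hv with rfl
        exact ⟨[], List.Forall₂.nil, by simp only [List.sum_nil]; omega, rfl⟩
      · cases hv
    · rintro ⟨es, hok, hsum, rfl⟩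
      have : es = [] := List.forall₂_nil_right_iff.mp hok
      subst this
      simp only [List.sum_nil] at hsum
      rw [if_pos hsum.symm]
      simp [sumW]
  | cons t ts ih =>
    intro b v
    simp only [valsF, List.mem_flatMap, List.mem_map]
    constructor
    · rintro ⟨e, he, v0, hv0, rfl⟩
      have heb := PySem.List.mem_pyRange_one.mp he
      obtain ⟨es, hok, hsum, rfl⟩ := (ih (b - e) v0).mp hv0
      refine ⟨e :: es, List.Forall₂.cons ⟨by omega, by omega⟩ hok, by simp [hsum], ?_⟩
      simp only [sumW, List.zipWith_cons_cons, List.sum_cons]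
      ring
    · rintro ⟨es, hok, hsum, rfl⟩
      cases hok with
      | cons hp htail =>
        rename_i e es'
        have h0 : 0 ≤ List.sum es' := eok_nonneg reqs ts es' htail
        simp only [List.sum_cons] at hsum
        refine ⟨e, PySem.List.mem_pyRange_one.mpr ⟨by omega, by omega⟩,
          sumW reqs ts es', (ih (b - e) _).mpr ⟨es', htail, by omega, rfl⟩, ?_⟩
        simp only [sumW, List.zipWith_cons_cons, List.sum_cons]
        ring

theorem mem_valsG (reqs : List (List Int)) : ∀ (rts : List Int) (b v : Int),
    (∀ t ∈ rts, 0 ≤ capI reqs t) →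
    (v ∈ valsG reqs rts b ↔
      ∃ es, EOkB reqs rts es ∧ es.sum = b ∧ SatW reqs rts es ∧ v = sumW reqs rts es) := by
  intro rts
  induction rts with
  | nil =>
    intro b v _
    simp only [valsG]
    constructor
    · intro hv; cases hv
    · rintro ⟨es, hok, -, hsat, -⟩
      have : es = [] := List.forall₂_nil_right_iff.mp hok
      subst this
      cases hsat
  | cons t ts ih =>
    intro b v hcap
    have hcapt : 0 ≤ capI reqs t := hcap t (by simp)
    have hcap' : ∀ u ∈ ts, 0 ≤ capI reqs u := fun u hu => hcap u (by simp [hu])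
    simp only [valsG, List.mem_append, List.mem_flatMap, List.mem_map]
    constructor
    · rintro (⟨e, he, v0, hv0, rfl⟩ | hv)
      · have heb := PySem.List.mem_pyRange_one.mp he
        obtain ⟨es, hok, hsum, hsat, rfl⟩ := (ih (b - e) v0 hcap').mp hv0
        refine ⟨e :: es, List.Forall₂.cons ⟨by omega, by omega⟩ hok, by simp [hsum],
          Or.inr hsat, ?_⟩
        simp only [sumW, List.zipWith_cons_cons, List.sum_cons]
        ring
      · split at hv
        · rename_i hbc
          obtain ⟨v0, hv0, rfl⟩ := List.mem_map.mp hv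
          obtain ⟨es, hok, hsum, rfl⟩ := (mem_valsF reqs ts (b - capI reqs t) v0).mp hv0
          refine ⟨capI reqs t :: es, List.Forall₂.cons ⟨hcapt, le_refl _⟩ hok,
            by simp [hsum], Or.inl rfl, ?_⟩
          simp only [sumW, List.zipWith_cons_cons, List.sum_cons]
          ring
        · cases hv
    · rintro ⟨es, hok, hsum, hsat, rfl⟩
      cases hok with
      | cons hp htail =>
        rename_i e es'
        simp only [List.sum_cons] at hsum
        rcases hsat with hsat | hsat
        · right
          have h0 : 0 ≤ List.sum es' := eok_nonneg reqs ts es' htail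
          rw [if_pos (by omega : b ≥ capI reqs t)]
          refine List.mem_map.mpr ⟨sumW reqs ts es',
            (mem_valsF reqs ts (b - capI reqs t) _).mpr ⟨es', htail, by omega, rfl⟩, ?_⟩
          simp only [sumW, List.zipWith_cons_cons, List.sum_cons, hsat]
          ring
        · left
          have h0 : 0 ≤ List.sum es' := eok_nonneg reqs ts es' htail
          refine ⟨e, PySem.List.mem_pyRange_one.mpr ⟨by omega, by omega⟩,
            sumW reqs ts es', (ih (b - e) _ hcap').mpr ⟨es', htail, by omega, hsat, rfl⟩, ?_⟩
          simp only [sumW, List.zipWith_cons_cons, List.sum_cons]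
          ring

-- ---------- optional-minimum / DP algebra ----------

theorem omin2_none_left (b : Option Int) : omin2 none b = b := by
  cases b <;> rfl

theorem omin2_assoc (a b c : Option Int) : omin2 (omin2 a b) c = omin2 a (omin2 b c) := by
  cases c with
  | none => rfl
  | some w =>
    cases b with
    | none => rfl
    | some v =>
      show optMin (optMin a v) w = omin2 a (optMin (some v) w)
      rw [optMin_eq (some v) w]
      cases a with
      | none =>
        show optMin (some v) w = optMin none (min v w)
        rw [optMin_eq, optMin_eq]
      | some u =>
        show optMin (optMin (some u) v) w = optMin (some u) (min v w)
        rw [optMin_eq (some u) v, optMin_eq, optMin_eq]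
        simp only [Option.some.injEq]
        exact min_assoc u v w

theorem foldl_optMin_flat (g : Int → List Int) (wf : Int → Int) :
    ∀ (cs : List Int) (b : Option Int),
    cs.foldl (fun b c => match minO (g c) with | none => b | some v => optMin b (v + wf c)) b
      = omin2 b (minO (cs.flatMap (fun c => (g c).map (· + wf c)))) := by
  intro cs
  induction cs with
  | nil => intro b; rfl
  | cons c cs ih =>
    intro b
    rw [List.foldl_cons, ih, List.flatMap_cons, minO_append, ← omin2_assoc]
    congr 1
    cases hg : minO (g c) with
    | none =>
      have : g c = [] := by
        cases hgc : g c with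
        | nil => rfl
        | cons x xs => rw [hgc, minO_cons] at hg; cases hg
      rw [this]
      rfl
    | some v =>
      have hmap : minO ((g c).map (· + wf c)) = some (v + wf c) := by
        rw [minO_map_add, hg]
        rfl
      rw [hmap]
      rfl

theorem omin2_step (X : List Int) (g : Option Int) (w : Int) :
    (match minO X with | none => g | some v => optMin g (v + w)) =
      omin2 g (minO (X.map (· + w))) := by
  cases hX : minO X with
  | none =>
    have : X = [] := by
      cases hX' : X with
      | nil => rfl
      | cons x xs => rw [hX', minO_cons] at hX; cases hX
    rw [this]
    rfl
  | some v =>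
    have : minO (X.map (· + w)) = some (v + w) := by
      rw [minO_map_add, hX]; rfl
    rw [this]
    rfl

-- W[e] = cost(rs, e+1): indexing the per-type cost table
theorem pyGetD_W0 (f : Int → Int) (N e : Int) (h1 : 0 ≤ e) (h2 : e < N) :
    PySem.List.pyGetD ((PySem.List.pyRange 1 (N + 1) 1).map f) e 0 = f (e + 1) := by
  have he : e = ((e.toNat : Nat) : Int) := by omega
  rw [he, PySem.List.pyGetD_natCast]
  have hlt : e.toNat < ((PySem.List.pyRange 1 (N + 1) 1).map f).length := by
    rw [List.length_map, PySem.List.length_pyRange_one]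
    omega
  rw [List.getD_eq_getElem _ _ hlt, List.getElem_map, PySem.List.getElem_pyRange_one]
  congr 1
  omega

theorem capI_eq (reqs : List (List Int)) (t : Int) :
    ((groupB reqs t).length : Int) - 1 = capI reqs t := by
  rw [groupB_eq, List.length_map]
  rfl

theorem dpInner_char (reqs : List (List Int)) (B0 : Int) (rts : List Int) (t b : Int)
    (hB0 : 0 ≤ B0) (hb0 : 0 ≤ b) (hbB : b ≤ B0) (hcap : 0 ≤ capI reqs t) :
    dpInner ((PySem.List.pyRange 0 (B0 + 1) 1).map (fun b => minO (valsF reqs rts b)))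
        ((PySem.List.pyRange 0 (B0 + 1) 1).map (fun b => minO (valsG reqs rts b)))
        ((PySem.List.pyRange 1 (((groupB reqs t).length : Int) + 1) 1).map
          (fun m => costB (groupB reqs t) m))
        b (((groupB reqs t).length : Int) - 1) =
      (minO ((PySem.List.pyRange 0 (min b (capI reqs t) + 1) 1).flatMap
          (fun e => (valsF reqs rts (b - e)).map (· + valT reqs t (e + 1)))),
       minO ((PySem.List.pyRange 0 (min b (capI reqs t) + 1) 1).flatMap
          (fun e => (valsG reqs rts (b - e)).map (· + valT reqs t (e + 1))))) := by
  have hlen := capI_eq reqs t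
  unfold dpInner
  rw [hlen]
  refine (PySem.List.foldl_congr_mem _ _
      (fun (p : Option Int × Option Int) e =>
        ((fun (q : Option Int) e => match minO (valsF reqs rts (b - e)) with
          | none => q
          | some v => optMin q (v + valT reqs t (e + 1))) p.1 e,
         (fun (q : Option Int) e => match minO (valsG reqs rts (b - e)) with
          | none => q
          | some v => optMin q (v + valT reqs t (e + 1))) p.2 e)) _ ?_).trans ?_
  · intro p e he
    have heb := PySem.List.mem_pyRange_one.mp he
    simp only
    rw [PySem.List.pyGetD_map_pyRange_of_nonneg (fun b => minO (valsF reqs rts b)) (B0 + 1) (b - e) none (by omega) (by omega),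
      PySem.List.pyGetD_map_pyRange_of_nonneg (fun b => minO (valsG reqs rts b)) (B0 + 1) (b - e) none (by omega) (by omega),
      pyGetD_W0 (fun m => costB (groupB reqs t) m) ((groupB reqs t).length : Int) e (by omega) (by omega)]
    rfl
  · rw [PySem.List.foldl_prod_mk
        (f := fun (q : Option Int) e => match minO (valsF reqs rts (b - e)) with
          | none => q | some v => optMin q (v + valT reqs t (e + 1)))
        (g := fun (q : Option Int) e => match minO (valsG reqs rts (b - e)) with
          | none => q | some v => optMin q (v + valT reqs t (e + 1))),
      foldl_optMin_flat (fun e => valsF reqs rts (b - e)) (fun e => valT reqs t (e + 1)),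
      foldl_optMin_flat (fun e => valsG reqs rts (b - e)) (fun e => valT reqs t (e + 1))]
    simp only [omin2_none_left]

theorem pair_map_split {α β γ : Type} (l : List α) (h : α → β × γ) (f : α → β) (g : α → γ)
    (hc : ∀ b ∈ l, h b = (f b, g b)) :
    ((l.map h).map Prod.fst, (l.map h).map Prod.snd) = (l.map f, l.map g) := by
  have h1 : l.map h = l.map (fun b => (f b, g b)) := List.map_congr_left hc
  rw [h1, List.map_map, List.map_map]
  exact Prod.ext (List.map_congr_left fun b _ => rfl) (List.map_congr_left fun b _ => rfl)

theorem dpStepB_char (reqs : List (List Int)) (B0 : Int) (t : Int) (rts : List Int)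
    (hcap : 0 ≤ capI reqs t) (hB0 : 0 ≤ B0) :
    dpStepB reqs B0
      ((PySem.List.pyRange 0 (B0 + 1) 1).map (fun b => minO (valsF reqs rts b)),
       (PySem.List.pyRange 0 (B0 + 1) 1).map (fun b => minO (valsG reqs rts b))) t =
      ((PySem.List.pyRange 0 (B0 + 1) 1).map (fun b => minO (valsF reqs (t :: rts) b)),
       (PySem.List.pyRange 0 (B0 + 1) 1).map (fun b => minO (valsG reqs (t :: rts) b))) := by
  have hlen := capI_eq reqs t
  simp only [dpStepB]
  apply pair_map_split
  intro b hb
  have hbb := PySem.List.mem_pyRange_one.mp hb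
  rw [dpInner_char reqs B0 rts t b hB0 (by omega) (by omega) hcap]
  refine Prod.ext ?_ ?_
  · show minO _ = minO (valsF reqs (t :: rts) b)
    simp only [valsF]
  · show (if b ≥ ((groupB reqs t).length : Int) - 1 then _ else _) =
      minO (valsG reqs (t :: rts) b)
    by_cases hge : b ≥ ((groupB reqs t).length : Int) - 1
    · rw [if_pos hge,
        PySem.List.pyGetD_map_pyRange_of_nonneg (fun b => minO (valsF reqs rts b)) (B0 + 1)
          (b - (((groupB reqs t).length : Int) - 1)) none (by omega) (by omega),
        pyGetD_W0 (fun m => costB (groupB reqs t) m) ((groupB reqs t).length : Int)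
          (((groupB reqs t).length : Int) - 1) (by omega) (by omega),
        omin2_step]
      show omin2 (minO _) (minO _) = minO (valsG reqs (t :: rts) b)
      simp only [valsG]
      rw [if_pos (by omega : b ≥ capI reqs t), minO_append, hlen]
      rfl
    · rw [if_neg hge]
      show minO _ = minO (valsG reqs (t :: rts) b)
      simp only [valsG]
      rw [if_neg (by omega : ¬ b ≥ capI reqs t), List.append_nil]

theorem dpB_char (reqs : List (List Int)) (B0 : Int) (hB0 : 0 ≤ B0) :
    ∀ (ts : List Int), (∀ t ∈ ts, 0 ≤ capI reqs t) →
    ts.foldl (dpStepB reqs B0)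
        (some 0 :: List.replicate B0.toNat none, List.replicate (B0 + 1).toNat none) =
      ((PySem.List.pyRange 0 (B0 + 1) 1).map (fun b => minO (valsF reqs ts.reverse b)),
       (PySem.List.pyRange 0 (B0 + 1) 1).map (fun b => minO (valsG reqs ts.reverse b))) := by
  have hbase1 : (some 0 :: List.replicate B0.toNat (none : Option Int)) =
      (PySem.List.pyRange 0 (B0 + 1) 1).map (fun b => minO (valsF reqs [] b)) := by
    apply List.ext_getElem
    · simp [PySem.List.length_pyRange_one]
      omega
    · intro i h1 h2
      rw [List.getElem_map, PySem.List.getElem_pyRange_one]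
      simp only [valsF, zero_add]
      rcases i with _ | j
      · simp only [List.getElem_cons_zero]
        decide
      · simp only [List.getElem_cons_succ, List.getElem_replicate]
        rw [if_neg (by omega : ¬ ((j + 1 : Nat) : Int) = 0)]
        rfl
  have hbase2 : (List.replicate (B0 + 1).toNat (none : Option Int)) =
      (PySem.List.pyRange 0 (B0 + 1) 1).map (fun b => minO (valsG reqs [] b)) := by
    have h2 : (PySem.List.pyRange 0 (B0 + 1) 1).map (fun b => minO (valsG reqs [] b)) =
        (PySem.List.pyRange 0 (B0 + 1) 1).map (fun _ => (none : Option Int)) :=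
      List.map_congr_left (fun b _ => rfl)
    rw [h2, List.map_const']
    congr 1
    rw [PySem.List.length_pyRange_one]
    omega
  intro ts
  induction ts using List.reverseRecOn with
  | nil =>
    intro _
    rw [List.foldl_nil, hbase1, hbase2]
    rfl
  | append_singleton ts t ih =>
    intro hcap
    rw [List.foldl_append, List.foldl_cons, List.foldl_nil,
      ih (fun u hu => hcap u (by simp [hu])),
      dpStepB_char reqs B0 t ts.reverse (hcap t (by simp)) hB0,
      List.reverse_append]
    rfl

-- ---------- facts about the cost table and the type list ----------

-- a type never benefits from more counselors than it has requests
theorem valT_ge_len (reqs : List (List Int)) (t m : Int)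
    (h : ((grpRows reqs t).length : Int) ≤ m) : valT reqs t m = 0 := by
  unfold valT
  rw [groupB_eq, costB_eq _ _ (by omega : (0:Int) ≤ m),
    List.drop_eq_nil_of_le (by rw [List.length_map]; omega)]
  rfl

theorem valT_clip (reqs : List (List Int)) (t m : Int)
    (hne : grpRows reqs t ≠ []) (hm : 1 ≤ m) :
    valT reqs t m = valT reqs t (min (m - 1) (capI reqs t) + 1) := by
  have hlen : 1 ≤ (grpRows reqs t).length := List.length_pos_of_ne_nil hne
  by_cases hle : m - 1 ≤ capI reqs t
  · rw [min_eq_left hle]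
    congr 1
    omega
  · rw [min_eq_right (by omega)]
    unfold capI at *
    rw [valT_ge_len reqs t m (by omega), valT_ge_len reqs t _ (by omega)]

theorem mem_typesB (k : Int) (reqs : List (List Int)) (t : Int) :
    t ∈ typesB k reqs ↔
      (1 ≤ t ∧ t ≤ k ∧ ∃ row ∈ reqs, PySem.List.pyGetD row 2 0 = t) := by
  unfold typesB
  rw [PySem.List.mem_sorted, PySem.Set.mem_ofList, List.mem_map]
  constructor
  · rintro ⟨row, hrow, rfl⟩
    have h := List.mem_filter.mp hrow
    have hb := h.2
    simp only [Bool.and_eq_true, decide_eq_true_eq] at hb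
    exact ⟨hb.1, hb.2, row, h.1, rfl⟩
  · rintro ⟨h1, h2, row, hrow, rfl⟩
    refine ⟨row, List.mem_filter.mpr ⟨hrow, ?_⟩, rfl⟩
    simp only [Bool.and_eq_true, decide_eq_true_eq]
    exact ⟨h1, h2⟩

theorem typesB_pairwise_lt (k : Int) (reqs : List (List Int)) :
    (typesB k reqs).Pairwise (· < ·) :=
  PySem.List.sorted_ofList_pairwise_lt _

theorem typesB_nodup (k : Int) (reqs : List (List Int)) : (typesB k reqs).Nodup :=
  (typesB_pairwise_lt k reqs).imp (fun h => ne_of_lt h)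

theorem grpRows_ne_nil_iff (reqs : List (List Int)) (t : Int) :
    grpRows reqs t ≠ [] ↔ ∃ row ∈ reqs, rowC' row = t := by
  unfold grpRows
  rw [Ne, PySem.List.sorted_eq_nil_iff]
  rw [← Ne, ← List.isEmpty_eq_false_iff, List.isEmpty_eq_false_iff_exists_mem]
  constructor
  · rintro ⟨row, hrow⟩
    have h := List.mem_filter.mp hrow
    exact ⟨row, h.1, by simpa using h.2⟩
  · rintro ⟨row, hrow, ht⟩
    exact ⟨row, List.mem_filter.mpr ⟨hrow, by simpa using ht⟩⟩

-- two strictly increasing lists with the same members are equal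
theorem eq_of_pairwise_lt_mem : ∀ (l1 l2 : List Int), l1.Pairwise (· < ·) →
    l2.Pairwise (· < ·) → (∀ x, x ∈ l1 ↔ x ∈ l2) → l1 = l2 := by
  intro l1
  induction l1 with
  | nil =>
    intro l2 _ _ hm
    cases l2 with
    | nil => rfl
    | cons b l2' => exact absurd ((hm b).mpr (by simp)) (by simp)
  | cons a l1' ih =>
    intro l2 h1 h2 hm
    cases l2 with
    | nil => exact absurd ((hm a).mp (by simp)) (by simp)
    | cons b l2' =>
      have hab : a = b := by
        rcases List.mem_cons.mp ((hm a).mp (by simp)) with h | h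
        · exact h
        · have hba : b < a := (List.pairwise_cons.mp h2).1 a h
          rcases List.mem_cons.mp ((hm b).mpr (by simp)) with h' | h'
          · omega
          · have := (List.pairwise_cons.mp h1).1 b h'
            omega
      subst hab
      have htl : ∀ x, x ∈ l1' ↔ x ∈ l2' := by
        intro x
        constructor
        · intro hx
          have hax : a < x := (List.pairwise_cons.mp h1).1 x hx
          rcases List.mem_cons.mp ((hm x).mp (by simp [hx])) with rfl | h
          · omega
          · exact h
        · intro hx
          have hax : a < x := (List.pairwise_cons.mp h2).1 x hx
          rcases List.mem_cons.mp ((hm x).mpr (by simp [hx])) with rfl | h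
          · omega
          · exact h
      rw [ih l2' (List.pairwise_cons.mp h1).2 (List.pairwise_cons.mp h2).2 htl]

-- ---------- sum and lookup toolkit ----------

theorem sum_map_split (l : List Int) (p : Int → Bool) (f : Int → Int) :
    (l.map f).sum = ((l.filter p).map f).sum + ((l.filter (fun x => !p x)).map f).sum := by
  induction l with
  | nil => rfl
  | cons x l ih =>
    by_cases hx : p x
    · rw [List.filter_cons_of_pos hx, List.filter_cons_of_neg (by simp [hx])]
      simp only [List.map_cons, List.sum_cons]
      omega
    · rw [List.filter_cons_of_neg hx, List.filter_cons_of_pos (by simp [hx])]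
      simp only [List.map_cons, List.sum_cons]
      omega

theorem length_filter_split (l : List Int) (p : Int → Bool) :
    l.length = (l.filter p).length + (l.filter (fun x => !p x)).length := by
  induction l with
  | nil => rfl
  | cons x l ih =>
    by_cases hx : p x
    · rw [List.filter_cons_of_pos hx, List.filter_cons_of_neg (by simp [hx])]
      simp only [List.length_cons]
      omega
    · rw [List.filter_cons_of_neg hx, List.filter_cons_of_pos (by simp [hx])]
      simp only [List.length_cons]
      omega

theorem sum_if_ne_count (l : List Int) (a : Int) :
    (l.map (fun t => if t = a then (0 : Int) else 1)).sum =
      (l.length : Int) - (l.count a : Int) := by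
  induction l with
  | nil => rfl
  | cons x l ih =>
    simp only [List.map_cons, List.sum_cons, ih, List.length_cons]
    by_cases hx : x = a
    · subst hx
      rw [if_pos rfl, List.count_cons_self]
      push_cast
      omega
    · rw [if_neg hx, List.count_cons_of_ne hx]
      push_cast
      omega

theorem sum_ite_single (l : List Int) (a r : Int) (h : l.Nodup) :
    (l.map (fun t => if t = a then r else 0)).sum = if a ∈ l then r else 0 := by
  induction l with
  | nil => rfl
  | cons x l ih =>
    have hx := (List.nodup_cons.mp h).1
    rw [List.map_cons, List.sum_cons, ih (List.nodup_cons.mp h).2]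
    by_cases hxa : x = a
    · subst hxa
      rw [if_pos rfl, if_neg hx, if_pos (List.mem_cons.mpr (Or.inl rfl))]
      ring
    · rw [if_neg hxa]
      by_cases hal : a ∈ l
      · rw [if_pos hal, if_pos (List.mem_cons.mpr (Or.inr hal))]
        ring
      · rw [if_neg hal, if_neg (fun hmem => by
          rcases List.mem_cons.mp hmem with h' | h'
          · exact hxa h'.symm
          · exact hal h')]
        ring

theorem zip_snd : ∀ (l1 l2 : List Int), l1.length = l2.length →
    List.zipWith (fun _ e => e) l1 l2 = l2 := by
  intro l1
  induction l1 with
  | nil =>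
    intro l2 h
    cases l2 with
    | nil => rfl
    | cons b l2' => simp at h
  | cons a l1' ih =>
    intro l2 h
    cases l2 with
    | nil => simp at h
    | cons b l2' =>
      simp only [List.zipWith_cons_cons]
      rw [ih l2' (by simpa using h)]

theorem zip_same (g : Int → Int → Int) : ∀ (l : List Int),
    List.zipWith g l l = l.map (fun x => g x x) := by
  intro l
  induction l with
  | nil => rfl
  | cons x l ih => simp only [List.zipWith_cons_cons, List.map_cons, ih]

theorem map_lk (g : Int → Int → Int) : ∀ (rts es : List Int), rts.Nodup →
    es.length = rts.length →
    rts.map (fun t => g t (es.getD (rts.idxOf t) 0)) = List.zipWith g rts es := by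
  intro rts
  induction rts with
  | nil => intro es _ _; rfl
  | cons t rts' ih =>
    intro es hnd hlen
    cases es with
    | nil => simp at hlen
    | cons e es' =>
      have hnotmem := (List.nodup_cons.mp hnd).1
      simp only [List.map_cons, List.zipWith_cons_cons, List.idxOf_cons_self,
        List.getD_cons_zero]
      congr 1
      rw [← ih es' (List.nodup_cons.mp hnd).2 (by simpa using hlen)]
      apply List.map_congr_left
      intro u hu
      have hut : t ≠ u := fun h => hnotmem (h ▸ hu)
      rw [List.idxOf_cons_ne _ hut, List.getD_cons_succ]

theorem lk_bounds {P : Int → Int → Prop} : ∀ (rts es : List Int),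
    List.Forall₂ P es rts → rts.Nodup → ∀ t ∈ rts, P (es.getD (rts.idxOf t) 0) t := by
  intro rts
  induction rts with
  | nil => intro es _ _ t ht; simp at ht
  | cons u rts' ih =>
    intro es hf hnd t ht
    cases hf with
    | cons hp htail =>
      rename_i e es'
      rcases List.mem_cons.mp ht with rfl | ht'
      · rw [List.idxOf_cons_self, List.getD_cons_zero]
        exact hp
      · have hut : u ≠ t := fun h => (List.nodup_cons.mp hnd).1 (h ▸ ht')
        rw [List.idxOf_cons_ne _ hut, List.getD_cons_succ]
        exact ih es' htail (List.nodup_cons.mp hnd).2 t ht'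

theorem lk_off (rts es : List Int) (t : Int) (hlen : es.length = rts.length)
    (h : t ∉ rts) : es.getD (rts.idxOf t) 0 = 0 := by
  rw [List.idxOf_eq_length h]
  exact List.getD_eq_default es 0 (by omega)

theorem eok_map (reqs : List (List Int)) (f : Int → Int) : ∀ (rts : List Int),
    (∀ t ∈ rts, 0 ≤ f t ∧ f t ≤ capI reqs t) → EOkB reqs rts (rts.map f) := by
  intro rts
  induction rts with
  | nil => intro _; exact List.Forall₂.nil
  | cons t rts' ih =>
    intro h
    exact List.Forall₂.cons (h t (by simp)) (ih (fun u hu => h u (by simp [hu])))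

theorem satw_map (reqs : List (List Int)) (f : Int → Int) : ∀ (rts : List Int) (t₀ : Int),
    t₀ ∈ rts → f t₀ = capI reqs t₀ → SatW reqs rts (rts.map f) := by
  intro rts
  induction rts with
  | nil => intro t₀ h; simp at h
  | cons t rts' ih =>
    intro t₀ ht₀ hf
    rcases List.mem_cons.mp ht₀ with rfl | h'
    · exact Or.inl hf
    · exact Or.inr (ih t₀ h' hf)

theorem sat_lookup (reqs : List (List Int)) : ∀ (rts es : List Int), rts.Nodup →
    SatW reqs rts es → ∃ t₀ ∈ rts, es.getD (rts.idxOf t₀) 0 = capI reqs t₀ := by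
  intro rts
  induction rts with
  | nil =>
    intro es _ hsat
    cases es <;> cases hsat
  | cons t rts' ih =>
    intro es hnd hsat
    cases es with
    | nil => cases hsat
    | cons e es' =>
      rcases hsat with h | h
      · exact ⟨t, by simp, by rw [List.idxOf_cons_self, List.getD_cons_zero]; exact h⟩
      · obtain ⟨t₀, ht₀, hh⟩ := ih es' (List.nodup_cons.mp hnd).2 h
        have htt : t ≠ t₀ := fun hc => (List.nodup_cons.mp hnd).1 (hc ▸ ht₀)
        exact ⟨t₀, by simp [ht₀], by rw [List.idxOf_cons_ne _ htt, List.getD_cons_succ]; exact hh⟩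

theorem sumW_map (reqs : List (List Int)) (rts : List Int) (f : Int → Int) :
    sumW reqs rts (rts.map f) = (rts.map (fun t => valT reqs t (f t + 1))).sum := by
  unfold sumW
  rw [List.zipWith_map_right, zip_same]

-- ---------- final assembly ----------

theorem matchFM (b : Int) (xs : List Int) :
    (match minO xs with
      | none => b
      | some v => if v < b then v else b) = FM b xs := by
  cases xs with
  | nil => rfl
  | cons x t =>
    rw [minO_cons]
    show (if FM x t < b then FM x t else b) = FM b (x :: t)
    have h1 : FM b (x :: t) = min b (FM x t) := by
      show FM (min b x) t = min b (FM x t)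
      exact FM_min b x t
    rw [h1]
    by_cases h : FM x t < b
    · rw [if_pos h, min_eq_right (le_of_lt h)]
    · rw [if_neg h, min_eq_left (not_lt.mp h)]

theorem FMflat (g : Int → List Int) : ∀ (ss : List Int) (b : Int),
    ss.foldl (fun best s => FM best (g s)) b = FM b (ss.flatMap g) := by
  intro ss
  induction ss with
  | nil => intro b; rfl
  | cons s ss ih =>
    intro b
    rw [List.foldl_cons, ih, List.flatMap_cons, FM_append]

theorem foldl_sim_FM (simf : List Int → Int) (l : List (List Int)) : ∀ b : Int,
    l.foldl (fun m i => if simf i < m then simf i else m) b = FM b (l.map simf) := by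
  induction l with
  | nil => intro b; rfl
  | cons i l ih =>
    intro b
    rw [List.foldl_cons, List.map_cons, ih]
    show FM (if simf i < b then simf i else b) (l.map simf) = FM (min b (simf i)) (l.map simf)
    congr 1
    by_cases h : simf i < b
    · rw [if_pos h, min_eq_right (le_of_lt h)]
    · rw [if_neg h, min_eq_left (not_lt.mp h)]

theorem hl_of_elems (L : List Int) (k : Int) (hlen : k.toNat < L.length)
    (hel : ∀ y ∈ L, y = 0 ∨ 1 ≤ y) :
    ∀ t, 1 ≤ t → t ≤ k → 0 ≤ PySem.List.pyGetD L (t - 1) 0 := by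
  intro t h1 h2
  rw [PySem.List.pyGetD_eq_getElem L 0 (by omega) (by push_cast; omega)]
  have hmem : L[(t - 1).toNat]'(by push_cast; omega) ∈ L := List.getElem_mem _
  rcases hel _ hmem with h | h <;> omega

theorem solution_A_form (k n : Int) (reqs : List (List Int)) :
    solution k n reqs = FM 100000000000000000
      (((partitionA n k).foldl
        (fun s i => (PySem.List.permutations i i.length).foldl (fun s j => s.add j) s)
        (PySem.Set.ofList [])).map (simulateA k n reqs)) := by
  unfold solution
  exact foldl_sim_FM (simulateA k n reqs) _ 100000000000000000

theorem solution_deg (k n : Int) (reqs : List (List Int)) (h : ¬ (1 ≤ k ∧ k ≤ n)) :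
    solution k n reqs = 100000000000000000 := by
  unfold solution
  rw [partitionA_nil n k h]
  rfl

theorem caps_map_eq (k : Int) (reqs : List (List Int)) :
    (typesB k reqs).map (fun t =>
        ((reqs.filter (fun row => PySem.List.pyGetD row 2 0 == t)).length : Int) - 1) =
      (typesB k reqs).map (fun t => capI reqs t) := by
  apply List.map_congr_left
  intro t _
  unfold capI grpRows
  rw [PySem.List.length_sorted]
  rfl

theorem solution_B_form (k n : Int) (reqs : List (List Int)) (hk : 1 ≤ k) (hn : k ≤ n)
    (hcap : ∀ t ∈ typesB k reqs, 0 ≤ capI reqs t) :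
    solution_alt k n reqs = FM 100000000000000000
      ((if n - k ≤ min (n - k) (((typesB k reqs).map (fun t => capI reqs t)).sum) then
          valsF reqs (typesB k reqs).reverse (n - k) else []) ++
       ((if ((typesB k reqs).length : Int) < k then
          (PySem.List.pyRange 0 (min (n - k) (((typesB k reqs).map (fun t => capI reqs t)).sum) + 1) 1).flatMap
            (fun b => valsF reqs (typesB k reqs).reverse b) else []) ++
        (PySem.List.pyRange 0 (min (n - k) (((typesB k reqs).map (fun t => capI reqs t)).sum) + 1) 1).flatMap
          (fun b => valsG reqs (typesB k reqs).reverse b))) := by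
  have hM0 : 0 ≤ ((typesB k reqs).map (fun t => capI reqs t)).sum := by
    apply List.sum_nonneg
    intro x hx
    obtain ⟨t, ht, rfl⟩ := List.mem_map.mp hx
    exact hcap t ht
  set M := ((typesB k reqs).map (fun t => capI reqs t)).sum with hM
  set B0 := min (n - k) M with hB0def
  have hB0 : 0 ≤ B0 := le_min (by omega) hM0
  unfold solution_alt
  rw [if_neg (by omega)]
  simp only
  rw [caps_map_eq, ← hM, ← hB0def,
    dpB_char reqs B0 hB0 (typesB k reqs) hcap]
  simp only
  set rts := (typesB k reqs).reverse with hrts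
  -- best1 = FM BIG C1
  have hbest1 : (if n - k ≤ B0 then
      match PySem.List.pyGetD ((PySem.List.pyRange 0 (B0 + 1) 1).map
          (fun b => minO (valsF reqs rts b))) (n - k) none with
      | none => (100000000000000000 : Int)
      | some v => if v < 100000000000000000 then v else 100000000000000000
    else (100000000000000000 : Int)) =
      FM 100000000000000000 (if n - k ≤ B0 then valsF reqs rts (n - k) else []) := by
    by_cases h1 : n - k ≤ B0
    · rw [if_pos h1, if_pos h1,
        PySem.List.pyGetD_map_pyRange_of_nonneg (fun b => minO (valsF reqs rts b)) (B0 + 1)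
          (n - k) none (by omega) (by omega)]
      exact matchFM 100000000000000000 (valsF reqs rts (n - k))
    · rw [if_neg h1, if_neg h1]
      rfl
  rw [hbest1]
  set c1 : Int := FM 100000000000000000 (if n - k ≤ B0 then valsF reqs rts (n - k) else [])
    with hc1
  -- best2 = FM c1 C2
  have hstepF : ∀ (acc : Int), ∀ b ∈ PySem.List.pyRange 0 (B0 + 1) 1,
      (fun (best : Int) b =>
        match PySem.List.pyGetD ((PySem.List.pyRange 0 (B0 + 1) 1).map
            (fun b => minO (valsF reqs rts b))) b none with
        | none => best
        | some v => if v < best then v else best) acc b =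
      (fun (best : Int) b => FM best (valsF reqs rts b)) acc b := by
    intro acc b hb
    have hbb := PySem.List.mem_pyRange_one.mp hb
    simp only
    rw [PySem.List.pyGetD_map_pyRange_of_nonneg (fun b => minO (valsF reqs rts b)) (B0 + 1)
      b none (by omega) (by omega)]
    exact matchFM acc _
  have hstepG : ∀ (acc : Int), ∀ b ∈ PySem.List.pyRange 0 (B0 + 1) 1,
      (fun (best : Int) b =>
        match PySem.List.pyGetD ((PySem.List.pyRange 0 (B0 + 1) 1).map
            (fun b => minO (valsG reqs rts b))) b none with
        | none => best
        | some v => if v < best then v else best) acc b =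
      (fun (best : Int) b => FM best (valsG reqs rts b)) acc b := by
    intro acc b hb
    have hbb := PySem.List.mem_pyRange_one.mp hb
    simp only
    rw [PySem.List.pyGetD_map_pyRange_of_nonneg (fun b => minO (valsG reqs rts b)) (B0 + 1)
      b none (by omega) (by omega)]
    exact matchFM acc _
  have hbest2 : (if ((typesB k reqs).length : Int) < k then
      (PySem.List.pyRange 0 (B0 + 1) 1).foldl (fun best b =>
        match PySem.List.pyGetD ((PySem.List.pyRange 0 (B0 + 1) 1).map
            (fun b => minO (valsF reqs rts b))) b none with
        | none => best
        | some v => if v < best then v else best) c1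
    else c1) =
      FM c1 (if ((typesB k reqs).length : Int) < k then
        (PySem.List.pyRange 0 (B0 + 1) 1).flatMap (fun b => valsF reqs rts b) else []) := by
    by_cases h2 : ((typesB k reqs).length : Int) < k
    · rw [if_pos h2, if_pos h2, PySem.List.foldl_congr_mem _ _ _ _ hstepF, FMflat]
    · rw [if_neg h2, if_neg h2]
      rfl
  rw [hbest2, PySem.List.foldl_congr_mem _ _ _ _ hstepG, FMflat, ← FM_append, hc1, ← FM_append]

theorem alt_k_nonpos (k n : Int) (reqs : List (List Int)) (hk : k ≤ 0) (hn : 0 ≤ n) :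
    solution_alt k n reqs = if k = 0 ∧ n = 0 then 0 else 100000000000000000 := by
  have hts : typesB k reqs = [] := by
    unfold typesB
    have hfil : reqs.filter (fun row => decide (1 ≤ PySem.List.pyGetD row 2 0) &&
        decide (PySem.List.pyGetD row 2 0 ≤ k)) = [] := by
      apply List.filter_eq_nil_iff.mpr
      intro r _
      simp only [Bool.and_eq_true, decide_eq_true_eq, not_and]
      omega
    rw [hfil]
    rfl
  unfold solution_alt
  rw [if_neg (by omega)]
  simp only [hts]
  simp only [List.map_nil, List.sum_nil, List.length_nil, List.foldl_nil, Nat.cast_zero]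
  rw [min_eq_right (by omega : (0:Int) ≤ n - k)]
  have hrange : PySem.List.pyRange 0 (0 + 1) 1 = [(0 : Int)] := by
    rw [zero_add]
    exact PySem.List.pyRange_one_singleton 0
  by_cases h : n - k ≤ 0
  · have hk0 : k = 0 := by omega
    have hn0 : n = 0 := by omega
    subst hk0
    subst hn0
    decide
  · rw [if_neg h, if_neg (by omega : ¬ (0:Int) < k), hrange]
    simp only [zero_add, Int.toNat_one, List.replicate_one, List.foldl_cons, List.foldl_nil,
      PySem.List.pyGetD_zero_cons]
    rw [if_neg (by omega : ¬ (k = 0 ∧ n = 0))]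

theorem R_map_getD (L : List Int) (k : Int) (hk : 0 ≤ k) (hlen : L.length = k.toNat + 1) :
    (PySem.List.pyRange 1 (k + 1) 1).map (fun t => PySem.List.pyGetD L (t - 1) 0) =
      L.take k.toNat := by
  apply List.ext_getElem
  · rw [List.length_map, PySem.List.length_pyRange_one, List.length_take]
    omega
  · intro i h1 h2
    rw [List.getElem_map, PySem.List.getElem_pyRange_one, List.getElem_take]
    rw [List.length_map, PySem.List.length_pyRange_one] at h1
    rw [show (1 + (i : Int) - 1) = ((i : Nat) : Int) from by omega,
      PySem.List.pyGetD_eq_getElem L 0 (by omega) (by push_cast; omega)]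
    simp only [Int.toNat_natCast]

theorem getD_mk (f : Int → Int) (k t : Int) (h1 : 1 ≤ t) (h2 : t ≤ k) :
    PySem.List.pyGetD ((PySem.List.pyRange 1 (k + 1) 1).map f ++ [0]) (t - 1) 0 = f t := by
  have hlen : ((PySem.List.pyRange 1 (k + 1) 1).map f).length = k.toNat := by
    rw [List.length_map, PySem.List.length_pyRange_one]
    omega
  rw [PySem.List.pyGetD_eq_getElem _ 0 (by omega)
    (by rw [List.length_append, hlen]; push_cast; omega)]
  rw [List.getElem_append_left (by rw [hlen]; omega)]
  rw [List.getElem_map, PySem.List.getElem_pyRange_one]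
  congr 1
  omega

-- getElem facts about the split around the unique zero
theorem getElem_idx_congr (l : List Int) (i j : Nat) (h : i = j) (hj : j < l.length) :
    l[i]'(h ▸ hj) = l[j]'hj := by
  subst h
  rfl

theorem append_mid_zero (P Q : List Int) :
    (P ++ 0 :: Q)[P.length]'(by simp) = 0 := by
  induction P with
  | nil => rfl
  | cons p P ih =>
    simp only [List.cons_append, List.length_cons, List.getElem_cons_succ]
    exact ih

theorem append_mid_zero_unique (P Q : List Int) (hP : (0 : Int) ∉ P) (hQ : (0 : Int) ∉ Q) :
    ∀ (i : Nat) (hi : i < (P ++ 0 :: Q).length), (P ++ 0 :: Q)[i] = 0 → i = P.length := by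
  induction P with
  | nil =>
    intro i hi h0
    cases i with
    | zero => rfl
    | succ j =>
      exfalso
      simp only [List.nil_append, List.getElem_cons_succ] at h0
      exact hQ (h0 ▸ List.getElem_mem (by simpa using hi))
  | cons p P ih =>
    intro i hi h0
    cases i with
    | zero =>
      exfalso
      simp only [List.cons_append, List.getElem_cons_zero] at h0
      exact hP (h0 ▸ List.mem_cons.mpr (Or.inl rfl))
    | succ j =>
      simp only [List.cons_append, List.getElem_cons_succ] at h0
      have := ih (fun hm => hP (List.mem_cons.mpr (Or.inr hm))) j
        (by simpa using hi) h0
      simp only [List.length_cons]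
      omega

-- the single-zero composition entries taken on a strictly increasing set of types
theorem comp_sum_bound (k : Int) (L P Q : List Int) (ts : List Int)
    (hk : 1 ≤ k)
    (hLlen : L.length = k.toNat + 1)
    (hLeq : L = P ++ 0 :: Q) (hP : (0 : Int) ∉ P) (hQ : (0 : Int) ∉ Q)
    (hel : ∀ y ∈ L, y = 0 ∨ 1 ≤ y)
    (hts_pw : ts.Pairwise (· < ·))
    (hts_mem : ∀ t ∈ ts, 1 ≤ t ∧ t ≤ k) :
    (ts.map (fun t => PySem.List.pyGetD L (t - 1) 0)).sum ≤
      L.sum - k + (ts.length : Int) := by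
  have hts_eq : ts = (PySem.List.pyRange 1 (k + 1) 1).filter (fun t => decide (t ∈ ts)) := by
    apply eq_of_pairwise_lt_mem
    · exact hts_pw
    · exact List.Pairwise.filter _ (PySem.List.pairwise_lt_pyRange_one 1 (k + 1))
    · intro x
      rw [List.mem_filter]
      constructor
      · intro hx
        refine ⟨PySem.List.mem_pyRange_one.mpr ?_, by simpa using hx⟩
        have := hts_mem x hx
        omega
      · rintro ⟨-, hx⟩
        simpa using hx
  have hknat : k.toNat < L.length := by omega
  have hd : L.drop k.toNat = [L[k.toNat]] := by
    rw [List.drop_eq_getElem_cons hknat]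
    congr 1
    apply List.drop_eq_nil_of_le
    omega
  have hsumtake : (L.take k.toNat).sum = L.sum - L[k.toNat] := by
    have h8 : L.sum = (L.take k.toNat).sum + (L.drop k.toNat).sum := by
      conv_lhs => rw [← List.take_append_drop k.toNat L]
      rw [List.sum_append]
    rw [hd] at h8
    simp only [List.sum_cons, List.sum_nil, add_zero] at h8
    omega
  have hRsum : ((PySem.List.pyRange 1 (k + 1) 1).map
      (fun t => PySem.List.pyGetD L (t - 1) 0)).sum = L.sum - L[k.toNat] := by
    rw [R_map_getD L k (by omega) hLlen, hsumtake]
  have hsplit := sum_map_split (PySem.List.pyRange 1 (k + 1) 1) (fun t => decide (t ∈ ts))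
    (fun t => PySem.List.pyGetD L (t - 1) 0)
  rw [← hts_eq] at hsplit
  -- lower bound on the off-part
  set off := (PySem.List.pyRange 1 (k + 1) 1).filter (fun t => !decide (t ∈ ts)) with hoff
  have hoff_sub : ∀ t ∈ off, t ∈ PySem.List.pyRange 1 (k + 1) 1 :=
    fun t ht => (List.mem_filter.mp ht).1
  have hz : ∀ (i : Nat) (hi : i < L.length), i ≠ P.length → 1 ≤ L[i]'hi := by
    intro i hi hne
    have hmem : L[i]'hi ∈ L := List.getElem_mem hi
    rcases hel _ hmem with h0 | h1
    · exfalso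
      have hi' : i < (P ++ 0 :: Q).length := by rw [← hLeq]; exact hi
      have h2 : (P ++ 0 :: Q)[i]'hi' = 0 := by
        rw [← List.getElem_of_eq hLeq hi]
        exact h0
      exact hne (append_mid_zero_unique P Q hP hQ i hi' h2)
    · exact h1
  have hoff_ge : ∀ t ∈ off, (if t = (P.length : Int) + 1 then (0 : Int) else 1) ≤
      PySem.List.pyGetD L (t - 1) 0 := by
    intro t ht
    have htR := PySem.List.mem_pyRange_one.mp (hoff_sub t ht)
    rw [PySem.List.pyGetD_eq_getElem L 0 (by omega) (by push_cast; omega)]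
    by_cases hzt : t = (P.length : Int) + 1
    · rw [if_pos hzt]
      have hmem : L[(t - 1).toNat]'(by push_cast; omega) ∈ L := List.getElem_mem _
      rcases hel _ hmem with h0 | h1 <;> omega
    · rw [if_neg hzt]
      exact hz (t - 1).toNat (by push_cast; omega) (by omega)
  have hoff_sum : ((off.map (fun t => if t = (P.length : Int) + 1 then (0 : Int) else 1)).sum) ≤
      (off.map (fun t => PySem.List.pyGetD L (t - 1) 0)).sum :=
    List.sum_le_sum hoff_ge
  rw [sum_if_ne_count off ((P.length : Int) + 1)] at hoff_sum
  have hoff_len : ts.length + off.length = (PySem.List.pyRange 1 (k + 1) 1).length := by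
    conv_lhs => rw [hts_eq]
    exact (length_filter_split (PySem.List.pyRange 1 (k + 1) 1)
      (fun t => decide (t ∈ ts))).symm
  have hRlen : (PySem.List.pyRange 1 (k + 1) 1).length = k.toNat := by
    rw [PySem.List.length_pyRange_one]
    omega
  have hoff_nodup : off.Nodup := (PySem.List.nodup_pyRange_one 1 (k + 1)).filter _
  have hcount : off.count ((P.length : Int) + 1) ≤ 1 :=
    List.nodup_iff_count_le_one.mp hoff_nodup _
  have hPlen : P.length ≤ k.toNat := by
    rw [hLeq] at hLlen
    simp only [List.length_append, List.length_cons] at hLlen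
    omega
  have hdP : off.count ((P.length : Int) + 1) ≤ L[k.toNat]'hknat := by
    by_cases hc : 1 ≤ off.count ((P.length : Int) + 1)
    · have hmem : ((P.length : Int) + 1) ∈ off := List.count_pos_iff.mp (by omega)
      have htR := PySem.List.mem_pyRange_one.mp (hoff_sub _ hmem)
      have hne : k.toNat ≠ P.length := by omega
      have := hz k.toNat hknat hne
      omega
    · have hd0 : 0 ≤ L[k.toNat]'hknat := by
        rcases hel _ (List.getElem_mem hknat) with h0 | h1 <;> omega
      omega
  omega

-- build the assignment realising an extras vector (plus r leftover dumped on t₀)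
theorem build_comp (k n : Int) (reqs : List (List Int)) (hk : 1 ≤ k) (hn : k ≤ n)
    (hc : ∀ r ∈ reqs, r.length = 3 ∧ 1 ≤ rowC' r ∧ rowC' r ≤ k)
    (es : List Int) (t₀ r : Int)
    (hEok : EOkB reqs (typesB k reqs).reverse es)
    (hr : 0 ≤ r)
    (hsum : es.sum + r = n - k)
    (ht₀ : (t₀ = 0 ∧ r = 0) ∨
           (1 ≤ t₀ ∧ t₀ ≤ k ∧ t₀ ∉ (typesB k reqs).reverse) ∨
           (t₀ ∈ (typesB k reqs).reverse ∧
             es.getD ((typesB k reqs).reverse.idxOf t₀) 0 = capI reqs t₀)) :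
    sumW reqs (typesB k reqs).reverse es ∈
      (((partitionA n k).foldl
        (fun s i => (PySem.List.permutations i i.length).foldl (fun s j => s.add j) s)
        (PySem.Set.ofList [])).map (simulateA k n reqs)) := by
  set ts := typesB k reqs with hts
  set rts := ts.reverse with hrts
  have hrts_nd : rts.Nodup := by
    rw [hrts]
    exact List.nodup_reverse.mpr (typesB_nodup k reqs)
  have hlen_eq : es.length = rts.length := hEok.length_eq
  set lk : Int → Int := fun t => es.getD (rts.idxOf t) 0 with hlk
  set f : Int → Int := fun t => 1 + lk t + (if t = t₀ then r else 0) with hf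
  have hlk_mem : ∀ t ∈ rts, 0 ≤ lk t ∧ lk t ≤ capI reqs t :=
    lk_bounds rts es hEok hrts_nd
  have hlk_off : ∀ t, t ∉ rts → lk t = 0 := fun t ht => lk_off rts es t hlen_eq ht
  have hlk_nn : ∀ t, 0 ≤ lk t := by
    intro t
    by_cases ht : t ∈ rts
    · exact (hlk_mem t ht).1
    · rw [hlk_off t ht]
  have hf1 : ∀ t, 1 ≤ f t := by
    intro t
    have := hlk_nn t
    simp only [hf]
    split <;> omega
  have hmem_rts : ∀ t, t ∈ rts ↔ t ∈ ts := fun t => List.mem_reverse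
  have hts_bounds : ∀ t ∈ ts, 1 ≤ t ∧ t ≤ k := by
    intro t ht
    have := (mem_typesB k reqs t).mp ht
    exact ⟨this.1, this.2.1⟩
  have hts_ne : ∀ t ∈ ts, grpRows reqs t ≠ [] := by
    intro t ht
    obtain ⟨-, -, row, hrow, hrt⟩ := (mem_typesB k reqs t).mp ht
    exact (grpRows_ne_nil_iff reqs t).mpr ⟨row, hrow, hrt⟩
  have hempty : ∀ t, 1 ≤ t → t ≤ k → t ∉ ts → grpRows reqs t = [] := by
    intro t h1 h2 hnot
    by_contra hne
    obtain ⟨row, hrow, hrt⟩ := (grpRows_ne_nil_iff reqs t).mp hne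
    exact hnot ((mem_typesB k reqs t).mpr ⟨h1, h2, row, hrow, hrt⟩)
  set cs : List Int := (PySem.List.pyRange 1 (k + 1) 1).map f with hcs
  set L : List Int := cs ++ [0] with hL
  have hcs_len : cs.length = k.toNat := by
    rw [hcs, List.length_map, PySem.List.length_pyRange_one]
    omega
  have hL_len : L.length = k.toNat + 1 := by
    rw [hL, List.length_append, hcs_len]
    rfl
  have hgetD : ∀ t, 1 ≤ t → t ≤ k → PySem.List.pyGetD L (t - 1) 0 = f t := by
    intro t h1 h2
    rw [hL, hcs]
    exact getD_mk f k t h1 h2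
  -- members of the candidate set
  have hel : ∀ y ∈ L, y = 0 ∨ 1 ≤ y := by
    intro y hy
    rw [hL] at hy
    rcases List.mem_append.mp hy with hy | hy
    · right
      obtain ⟨t, -, rfl⟩ := List.mem_map.mp (hcs ▸ hy)
      exact hf1 t
    · left
      simpa using hy
  have hcount : L.count 0 = 1 := by
    rw [hL, List.count_append]
    have hcs0 : cs.count 0 = 0 := by
      apply List.count_eq_zero.mpr
      intro hmem
      obtain ⟨t, -, hft⟩ := List.mem_map.mp (hcs ▸ hmem)
      have := hf1 t
      omega
    rw [hcs0]
    simp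
  have hts_eq_filter : ts = (PySem.List.pyRange 1 (k + 1) 1).filter
      (fun t => decide (t ∈ ts)) := by
    apply eq_of_pairwise_lt_mem
    · exact hts ▸ typesB_pairwise_lt k reqs
    · exact List.Pairwise.filter _ (PySem.List.pairwise_lt_pyRange_one 1 (k + 1))
    · intro x
      rw [List.mem_filter]
      constructor
      · intro hx
        refine ⟨PySem.List.mem_pyRange_one.mpr ?_, by simpa using hx⟩
        have := hts_bounds x hx
        omega
      · rintro ⟨-, hx⟩
        simpa using hx
  have hsum_ts_rts : ∀ g : Int → Int, (ts.map g).sum = (rts.map g).sum := by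
    intro g
    rw [hrts, List.map_reverse, List.sum_reverse_int]
  have hlk_zip := map_lk (fun _ e => e) rts es hrts_nd hlen_eq
  have hsum_lk_rts : (rts.map lk).sum = es.sum := by
    rw [hlk]
    show (rts.map (fun t => es.getD (rts.idxOf t) 0)).sum = es.sum
    rw [hlk_zip, zip_snd rts es hlen_eq.symm]
  have hLsum : L.sum = n := by
    rw [hL, List.sum_append, hcs]
    simp only [List.sum_cons, List.sum_nil, add_zero]
    have h1 : ((PySem.List.pyRange 1 (k + 1) 1).map f).sum =
        ((PySem.List.pyRange 1 (k + 1) 1).map (fun _ => (1 : Int))).sum +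
        (((PySem.List.pyRange 1 (k + 1) 1).map lk).sum +
         ((PySem.List.pyRange 1 (k + 1) 1).map (fun t => if t = t₀ then r else 0)).sum) := by
      rw [← PySem.List.sum_map_add_int, ← PySem.List.sum_map_add_int]
      apply congrArg
      apply List.map_congr_left
      intro t _
      simp only [hf]
      ring
    rw [h1, PySem.List.sum_map_const_int, PySem.List.length_pyRange_one]
    have h2 : ((PySem.List.pyRange 1 (k + 1) 1).map lk).sum = es.sum := by
      rw [sum_map_split (PySem.List.pyRange 1 (k + 1) 1) (fun t => decide (t ∈ ts)) lk,
        ← hts_eq_filter]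
      have hz : ((PySem.List.pyRange 1 (k + 1) 1).filter
          (fun t => !decide (t ∈ ts))).map lk = ((PySem.List.pyRange 1 (k + 1) 1).filter
          (fun t => !decide (t ∈ ts))).map (fun _ => (0 : Int)) := by
        apply List.map_congr_left
        intro t ht
        have := (List.mem_filter.mp ht).2
        simp only [Bool.not_eq_true', decide_eq_false_iff_not] at this
        exact hlk_off t (fun hmem => this ((hmem_rts t).mp hmem))
      rw [hz, PySem.List.sum_map_const_int]
      rw [hsum_ts_rts lk, hsum_lk_rts]
      ring
    rw [h2]
    have h3 : ((PySem.List.pyRange 1 (k + 1) 1).map (fun t => if t = t₀ then r else 0)).sum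
        = r := by
      rw [sum_ite_single _ t₀ r (PySem.List.nodup_pyRange_one 1 (k + 1))]
      rcases ht₀ with ⟨rfl, rfl⟩ | ⟨h1, h2, -⟩ | ⟨hmem, -⟩
      · split <;> rfl
      · rw [if_pos (PySem.List.mem_pyRange_one.mpr ⟨by omega, by omega⟩)]
      · have := hts_bounds t₀ ((hmem_rts t₀).mp hmem)
        rw [if_pos (PySem.List.mem_pyRange_one.mpr ⟨by omega, by omega⟩)]
    rw [h3]
    omega
  -- L is a candidate
  have hLmem := (mem_setL k n hk hn L).mpr ⟨hL_len, hcount, hel, hLsum⟩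
  refine List.mem_map.mpr ⟨L, hLmem, ?_⟩
  rw [simulateA_eq k n reqs L hk hc (hl_of_elems L k (by omega) hel)]
  rw [if_neg ?notbad]
  case notbad =>
    rintro ⟨t, ht, h0, -⟩
    have htb := PySem.List.mem_pyRange_one.mp ht
    rw [hgetD t (by omega) (by omega)] at h0
    have := hf1 t
    omega
  -- the waiting sum equals sumW
  rw [PySem.List.foldl_add, zero_add]
  have hmap1 : (PySem.List.pyRange 1 (k + 1) 1).map
      (fun t => valT reqs t (PySem.List.pyGetD L (t - 1) 0)) =
      (PySem.List.pyRange 1 (k + 1) 1).map (fun t => valT reqs t (f t)) := by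
    apply List.map_congr_left
    intro t ht
    have htb := PySem.List.mem_pyRange_one.mp ht
    rw [hgetD t (by omega) (by omega)]
  rw [hmap1]
  rw [sum_map_split (PySem.List.pyRange 1 (k + 1) 1) (fun t => decide (t ∈ ts))
    (fun t => valT reqs t (f t)), ← hts_eq_filter]
  have hoffz : ((PySem.List.pyRange 1 (k + 1) 1).filter (fun t => !decide (t ∈ ts))).map
      (fun t => valT reqs t (f t)) =
      ((PySem.List.pyRange 1 (k + 1) 1).filter (fun t => !decide (t ∈ ts))).map
      (fun _ => (0 : Int)) := by
    apply List.map_congr_left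
    intro t ht
    have htR := PySem.List.mem_pyRange_one.mp (List.mem_filter.mp ht).1
    have htnot := (List.mem_filter.mp ht).2
    simp only [Bool.not_eq_true', decide_eq_false_iff_not] at htnot
    have hgr : grpRows reqs t = [] := hempty t (by omega) (by omega) htnot
    apply valT_ge_len
    rw [hgr]
    have := hf1 t
    simp only [List.length_nil]
    omega
  rw [hoffz, PySem.List.sum_map_const_int]
  have hcore : (ts.map (fun t => valT reqs t (f t))).sum =
      (ts.map (fun t => valT reqs t (1 + lk t))).sum := by
    apply congrArg
    apply List.map_congr_left
    intro t ht
    by_cases htt : t = t₀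
    · subst htt
      rcases ht₀ with ⟨h0, -⟩ | ⟨-, -, hnot⟩ | ⟨hmem, hcap⟩
      · have := hts_bounds t ht
        omega
      · exact absurd ((hmem_rts t).mpr ht) hnot
      · have hne := hts_ne t ht
        have hlen1 : 1 ≤ (grpRows reqs t).length := List.length_pos_of_ne_nil hne
        have hlk_t : lk t = capI reqs t := hcap
        simp only [hf, if_pos rfl]
        rw [valT_ge_len reqs t _ (by unfold capI at hlk_t; omega),
          valT_ge_len reqs t _ (by unfold capI at hlk_t; omega)]
    · simp only [hf, if_neg htt]
      ring_nf
  rw [hcore]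
  have hfin : (ts.map (fun t => valT reqs t (1 + lk t))).sum = sumW reqs rts es := by
    rw [hsum_ts_rts]
    have h4 : rts.map (fun t => valT reqs t (1 + lk t)) =
        rts.map (fun t => valT reqs t (lk t + 1)) :=
      List.map_congr_left (fun t _ => by rw [add_comm])
    rw [h4, hlk]
    show (rts.map (fun t => (fun u e => valT reqs u (e + 1)) t (es.getD (rts.idxOf t) 0))).sum
      = sumW reqs rts es
    rw [map_lk (fun u e => valT reqs u (e + 1)) rts es hrts_nd hlen_eq]
    rfl
  rw [hfin]
  ring

-- ===== VERDICT (by name: the statement is the Claim_ definition above) =====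
theorem solution_spec : Claim_unchanged_solution := by
  intro k n reqs hdom hpre
  unfold Spec_solution
  intro hnD
  obtain ⟨hn0, hrows3, hrowsT⟩ := hpre
  by_cases hcase : 1 ≤ k ∧ k ≤ n
  · obtain ⟨hk, hn⟩ := hcase
    have hc : ∀ r ∈ reqs, r.length = 3 ∧ 1 ≤ rowC' r ∧ rowC' r ≤ k := by
      intro r hr
      have h3 := hrows3 hn r hr
      have ht := hrowsT ⟨hk, hn⟩ r hr
      have hcc : rowC' r = r.getD 2 0 := by
        unfold rowC'
        rw [PySem.List.pyGetD_eq_getElem r 0 (by omega) (by push_cast; omega),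
          List.getD_eq_getElem r 0 (by omega)]
        rfl
      rw [hcc]
      exact ⟨h3, ht.1, ht.2⟩
    set ts := typesB k reqs with hts
    set rts := ts.reverse with hrts
    have hrts_nd : rts.Nodup := List.nodup_reverse.mpr (typesB_nodup k reqs)
    have hts_bounds : ∀ t ∈ ts, 1 ≤ t ∧ t ≤ k := by
      intro t ht
      have := (mem_typesB k reqs t).mp ht
      exact ⟨this.1, this.2.1⟩
    have hts_ne : ∀ t ∈ ts, grpRows reqs t ≠ [] := by
      intro t ht
      obtain ⟨-, -, row, hrow, hrt⟩ := (mem_typesB k reqs t).mp ht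
      exact (grpRows_ne_nil_iff reqs t).mpr ⟨row, hrow, hrt⟩
    have hempty : ∀ t, 1 ≤ t → t ≤ k → t ∉ ts → grpRows reqs t = [] := by
      intro t h1 h2 hnot
      by_contra hne
      obtain ⟨row, hrow, hrt⟩ := (grpRows_ne_nil_iff reqs t).mp hne
      exact hnot ((mem_typesB k reqs t).mpr ⟨h1, h2, row, hrow, hrt⟩)
    have hcapts : ∀ t ∈ ts, 0 ≤ capI reqs t := by
      intro t ht
      have h1 := List.length_pos_of_ne_nil (hts_ne t ht)
      unfold capI
      omega
    have hcaprts : ∀ t ∈ rts, 0 ≤ capI reqs t :=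
      fun t ht => hcapts t (List.mem_reverse.mp ht)
    set M := (ts.map (fun t => capI reqs t)).sum with hM
    have hM0 : 0 ≤ M := by
      apply List.sum_nonneg
      intro x hx
      obtain ⟨t, ht, rfl⟩ := List.mem_map.mp hx
      exact hcapts t ht
    have hts_eq_filter : ts = (PySem.List.pyRange 1 (k + 1) 1).filter
        (fun t => decide (t ∈ ts)) := by
      apply eq_of_pairwise_lt_mem
      · exact typesB_pairwise_lt k reqs
      · exact List.Pairwise.filter _ (PySem.List.pairwise_lt_pyRange_one 1 (k + 1))
      · intro x
        rw [List.mem_filter]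
        constructor
        · intro hx
          refine ⟨PySem.List.mem_pyRange_one.mpr ?_, by simpa using hx⟩
          have := hts_bounds x hx
          omega
        · rintro ⟨-, hx⟩
          simpa using hx
    have hsum_ts_rts : ∀ g : Int → Int, (ts.map g).sum = (rts.map g).sum := by
      intro g
      rw [hrts, List.map_reverse, List.sum_reverse_int]
    rw [solution_A_form, solution_B_form k n reqs hk hn hcapts, ← hts, ← hrts, ← hM]
    apply FM_eq_of_mem _ (10 ^ 18) _ _ (by norm_num)
    · -- every B-side value is a simulated candidate value
      intro y hy
      rcases List.mem_append.mp hy with hy1 | hy23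
      · split at hy1
        · obtain ⟨es, hEok, hsum, rfl⟩ := (mem_valsF reqs rts (n - k) y).mp hy1
          exact build_comp k n reqs hk hn hc es 0 0 hEok (le_refl 0) (by omega)
            (Or.inl ⟨rfl, rfl⟩)
        · cases hy1
      · rcases List.mem_append.mp hy23 with hy2 | hy3
        · split at hy2
          · rename_i hplt
            obtain ⟨b, hb, hyb⟩ := List.mem_flatMap.mp hy2
            have hbb := PySem.List.mem_pyRange_one.mp hb
            obtain ⟨es, hEok, hsum, rfl⟩ := (mem_valsF reqs rts b y).mp hyb
            have hex : ∃ t₀, 1 ≤ t₀ ∧ t₀ ≤ k ∧ t₀ ∉ rts := by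
              by_contra hno
              push_neg at hno
              have hsub : PySem.List.pyRange 1 (k + 1) 1 ⊆ rts := by
                intro u hu
                have h1 := PySem.List.mem_pyRange_one.mp hu
                exact hno u (by omega) (by omega)
              have hle := (List.subperm_of_subset
                (PySem.List.nodup_pyRange_one 1 (k + 1)) hsub).length_le
              rw [PySem.List.length_pyRange_one, hrts, List.length_reverse] at hle
              omega
            obtain ⟨t₀, h1, h2, h3⟩ := hex
            refine build_comp k n reqs hk hn hc es t₀ (n - k - b) hEok
              (by omega) (by omega) (Or.inr (Or.inl ⟨h1, h2, h3⟩))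
          · cases hy2
        · obtain ⟨b, hb, hyb⟩ := List.mem_flatMap.mp hy3
          have hbb := PySem.List.mem_pyRange_one.mp hb
          obtain ⟨es, hEok, hsum, hsat, rfl⟩ := (mem_valsG reqs rts b y hcaprts).mp hyb
          obtain ⟨t₀, ht₀, hcap⟩ := sat_lookup reqs rts es hrts_nd hsat
          exact build_comp k n reqs hk hn hc es t₀ (n - k - b) hEok
            (by omega) (by omega) (Or.inr (Or.inr ⟨ht₀, hcap⟩))
    · -- every simulated candidate value is a B-side value or the 10^18 sentinel
      intro x hx
      obtain ⟨L, hLmem, rfl⟩ := List.mem_map.mp hx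
      obtain ⟨hLlen, hLcount, hLel, hLsum⟩ := (mem_setL k n hk hn L).mp hLmem
      rw [simulateA_eq k n reqs L hk hc (hl_of_elems L k (by omega) hLel)]
      by_cases hbad : ∃ t ∈ PySem.List.pyRange 1 (k + 1) 1,
          PySem.List.pyGetD L (t - 1) 0 = 0 ∧ grpRows reqs t ≠ []
      · rw [if_pos hbad]
        right
        exact le_refl _
      · rw [if_neg hbad]
        left
        have hmem0 : (0 : Int) ∈ L := List.count_pos_iff.mp (by omega)
        obtain ⟨P, Q, hPQ⟩ := List.append_of_mem hmem0
        have hPQ0 : (0 : Int) ∉ P ∧ (0 : Int) ∉ Q := by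
          have h2 := hLcount
          rw [hPQ, List.count_append, List.count_cons_self] at h2
          constructor <;> (rw [← List.count_eq_zero]; omega)
        have hcf_entry : ∀ t, 1 ≤ t → t ≤ k →
            PySem.List.pyGetD L (t - 1) 0 = 0 ∨ 1 ≤ PySem.List.pyGetD L (t - 1) 0 := by
          intro t h1 h2
          rw [PySem.List.pyGetD_eq_getElem L 0 (by omega) (by push_cast; omega)]
          exact hLel _ (List.getElem_mem _)
        have hcf1 : ∀ t ∈ ts, 1 ≤ PySem.List.pyGetD L (t - 1) 0 := by
          intro t ht
          have hb := hts_bounds t ht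
          rcases hcf_entry t hb.1 hb.2 with h0 | h1
          · exfalso
            exact hbad ⟨t, PySem.List.mem_pyRange_one.mpr ⟨by omega, by omega⟩, h0, hts_ne t ht⟩
          · exact h1
        set ff : Int → Int := fun t =>
          min (PySem.List.pyGetD L (t - 1) 0 - 1) (capI reqs t) with hff
        set es := rts.map ff with hes
        have hEok : EOkB reqs rts es := by
          apply eok_map
          intro t ht
          have h1 := hcf1 t (List.mem_reverse.mp ht)
          have h2 := hcaprts t ht
          exact ⟨le_min (by omega) h2, min_le_right _ _⟩
        have hessum_nn : 0 ≤ es.sum := eok_nonneg reqs rts es hEok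
        -- the simulated value is sumW
        have hval : (PySem.List.pyRange 1 (k + 1) 1).foldl
            (fun w t => w + valT reqs t (PySem.List.pyGetD L (t - 1) 0)) 0 =
            sumW reqs rts es := by
          rw [PySem.List.foldl_add, zero_add,
            sum_map_split (PySem.List.pyRange 1 (k + 1) 1) (fun t => decide (t ∈ ts))
              (fun t => valT reqs t (PySem.List.pyGetD L (t - 1) 0)), ← hts_eq_filter]
          have hoffz : ((PySem.List.pyRange 1 (k + 1) 1).filter (fun t => !decide (t ∈ ts))).map
              (fun t => valT reqs t (PySem.List.pyGetD L (t - 1) 0)) =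
              ((PySem.List.pyRange 1 (k + 1) 1).filter (fun t => !decide (t ∈ ts))).map
              (fun _ => (0 : Int)) := by
            apply List.map_congr_left
            intro t ht
            have htR := PySem.List.mem_pyRange_one.mp (List.mem_filter.mp ht).1
            have htnot := (List.mem_filter.mp ht).2
            simp only [Bool.not_eq_true', decide_eq_false_iff_not] at htnot
            have hgr : grpRows reqs t = [] := hempty t (by omega) (by omega) htnot
            apply valT_ge_len
            rw [hgr]
            have := hcf_entry t (by omega) (by omega)
            simp only [List.length_nil]
            omega
          rw [hoffz, PySem.List.sum_map_const_int]
          have hclip : ts.map (fun t => valT reqs t (PySem.List.pyGetD L (t - 1) 0)) =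
              ts.map (fun t => valT reqs t (ff t + 1)) := by
            apply List.map_congr_left
            intro t ht
            rw [valT_clip reqs t _ (hts_ne t ht) (hcf1 t ht)]
          rw [hclip, hsum_ts_rts, hes]
          have h4 : rts.map (fun t => valT reqs t (ff t + 1)) =
              rts.map (fun t => valT reqs t (ff t + 1)) := rfl
          rw [sumW_map reqs rts ff]
          ring
        rw [hval]
        -- sum bounds
        have hbound := comp_sum_bound k L P Q ts hk hLlen hPQ hPQ0.1 hPQ0.2 hLel
          (typesB_pairwise_lt k reqs) hts_bounds
        have hessum_ts : es.sum = (ts.map ff).sum := (hsum_ts_rts ff).symm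
        have hff_le : ∀ t ∈ ts, ff t ≤ PySem.List.pyGetD L (t - 1) 0 - 1 :=
          fun t _ => min_le_left _ _
        have hff_cap : ∀ t ∈ ts, ff t ≤ capI reqs t := fun t _ => min_le_right _ _
        have hsum_le1 : (ts.map ff).sum ≤
            (ts.map (fun t => PySem.List.pyGetD L (t - 1) 0 - 1)).sum :=
          List.sum_le_sum hff_le
        have hsum_sub : (ts.map (fun t => PySem.List.pyGetD L (t - 1) 0 - 1)).sum =
            (ts.map (fun t => PySem.List.pyGetD L (t - 1) 0)).sum - (ts.length : Int) := by
          have h5 : ts.map (fun t => PySem.List.pyGetD L (t - 1) 0 - 1) =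
              ts.map (fun t => PySem.List.pyGetD L (t - 1) 0 + (-1)) :=
            List.map_congr_left (fun t _ => by ring)
          rw [h5, PySem.List.sum_map_add_int, PySem.List.sum_map_const_int]
          ring
        have hessum_nk : es.sum ≤ n - k := by
          rw [hessum_ts]
          have := hLsum
          omega
        have hessum_M : es.sum ≤ M := by
          rw [hessum_ts, hM]
          exact List.sum_le_sum hff_cap
        by_cases hexact : es.sum = n - k
        · apply List.mem_append.mpr
          left
          rw [if_pos (by omega : n - k ≤ min (n - k) M)]
          exact (mem_valsF reqs rts (n - k) _).mpr ⟨es, hEok, hexact, rfl⟩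
        · by_cases hsat : ∃ t ∈ ts, capI reqs t < PySem.List.pyGetD L (t - 1) 0 - 1
          · obtain ⟨t₀, ht₀, hgt⟩ := hsat
            have hffcap : ff t₀ = capI reqs t₀ := min_eq_right (by omega)
            apply List.mem_append.mpr
            right
            apply List.mem_append.mpr
            right
            refine List.mem_flatMap.mpr ⟨es.sum,
              PySem.List.mem_pyRange_one.mpr ⟨hessum_nn, by omega⟩, ?_⟩
            exact (mem_valsG reqs rts es.sum _ hcaprts).mpr
              ⟨es, hEok, rfl, satw_map reqs ff rts t₀ (List.mem_reverse.mpr ht₀) hffcap, rfl⟩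
          · push_neg at hsat
            have hffeq : ∀ t ∈ ts, ff t = PySem.List.pyGetD L (t - 1) 0 - 1 :=
              fun t ht => min_eq_left (hsat t ht)
            have hessum_eq : es.sum =
                (ts.map (fun t => PySem.List.pyGetD L (t - 1) 0)).sum - (ts.length : Int) := by
              rw [hessum_ts, List.map_congr_left hffeq, hsum_sub]
            have hplt : ((ts.length : Nat) : Int) < k := by
              by_contra hge
              push_neg at hge
              have hsub : ts ⊆ PySem.List.pyRange 1 (k + 1) 1 := by
                intro t ht
                have := hts_bounds t ht
                exact PySem.List.mem_pyRange_one.mpr ⟨by omega, by omega⟩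
              have hple := (List.subperm_of_subset (typesB_nodup k reqs) hsub).length_le
              rw [PySem.List.length_pyRange_one, ← hts] at hple
              have hpk : ts.length = k.toNat := by omega
              have hofflen : ((PySem.List.pyRange 1 (k + 1) 1).filter
                  (fun t => !decide (t ∈ ts))).length = 0 := by
                have h6 := length_filter_split (PySem.List.pyRange 1 (k + 1) 1)
                  (fun t => decide (t ∈ ts))
                rw [← hts_eq_filter, PySem.List.length_pyRange_one] at h6
                omega
              have hoffnil := List.length_eq_zero_iff.mp hofflen
              have hRsub : ∀ t ∈ PySem.List.pyRange 1 (k + 1) 1, t ∈ ts := by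
                intro t ht
                by_contra hnot
                have h7 : t ∈ (PySem.List.pyRange 1 (k + 1) 1).filter
                    (fun t => !decide (t ∈ ts)) :=
                  List.mem_filter.mpr ⟨ht, by simpa using hnot⟩
                rw [hoffnil] at h7
                cases h7
              -- the zero entry lies either inside the first k positions or at the end
              by_cases hzk : P.length = k.toNat
              · -- last entry is the zero: the first k entries sum to n
                have hdval : L[k.toNat]'(by omega) = 0 := by
                  rw [getElem_idx_congr L k.toNat P.length hzk.symm (by omega),
                    List.getElem_of_eq hPQ (by omega)]
                  exact append_mid_zero P Q
                have hsum_take : ((PySem.List.pyRange 1 (k + 1) 1).map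
                    (fun t => PySem.List.pyGetD L (t - 1) 0)).sum = n := by
                  rw [R_map_getD L k (by omega) hLlen]
                  have h8 : L.sum = (L.take k.toNat).sum + (L.drop k.toNat).sum := by
                    conv_lhs => rw [← List.take_append_drop k.toNat L]
                    rw [List.sum_append]
                  have h9 : L.drop k.toNat = [L[k.toNat]'(by omega)] := by
                    rw [List.drop_eq_getElem_cons (by omega)]
                    congr 1
                    apply List.drop_eq_nil_of_le
                    omega
                  rw [h9, hdval] at h8
                  simp only [List.sum_cons, List.sum_nil, add_zero] at h8
                  omega
                have hsplit2 := sum_map_split (PySem.List.pyRange 1 (k + 1) 1)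
                  (fun t => decide (t ∈ ts)) (fun t => PySem.List.pyGetD L (t - 1) 0)
                rw [← hts_eq_filter, hoffnil] at hsplit2
                simp only [List.map_nil, List.sum_nil, add_zero] at hsplit2
                rw [← hsplit2, hsum_take] at hessum_eq
                omega
              · -- the zero sits among the first k entries, at a requested type: impossible
                have hzlt : P.length < k.toNat := by
                  have := hLlen
                  rw [hPQ] at this
                  simp only [List.length_append, List.length_cons] at this
                  omega
                have htz : ((P.length : Int) + 1) ∈ ts := hRsub _
                  (PySem.List.mem_pyRange_one.mpr ⟨by omega, by omega⟩)
                have hzero : PySem.List.pyGetD L ((P.length : Int) + 1 - 1) 0 = 0 := by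
                  rw [PySem.List.pyGetD_eq_getElem L 0 (by omega) (by push_cast; omega),
                    getElem_idx_congr L (((P.length : Int) + 1 - 1)).toNat P.length
                      (by omega) (by omega),
                    List.getElem_of_eq hPQ (by omega)]
                  exact append_mid_zero P Q
                have := hcf1 _ htz
                omega
            apply List.mem_append.mpr
            right
            apply List.mem_append.mpr
            left
            rw [if_pos hplt]
            refine List.mem_flatMap.mpr ⟨es.sum,
              PySem.List.mem_pyRange_one.mpr ⟨hessum_nn, by omega⟩, ?_⟩
            exact (mem_valsF reqs rts es.sum _).mpr ⟨es, hEok, rfl, rfl⟩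
  · by_cases hk : 1 ≤ k
    · rw [solution_deg k n reqs hcase]
      unfold solution_alt
      rw [if_pos (by omega)]
    · have hne : ¬ (k = 0 ∧ n = 0) := fun h => hnD ⟨h.1, h.2⟩
      rw [solution_deg k n reqs hcase, alt_k_nonpos k n reqs (by omega) hn0, if_neg hne]

theorem solution_changed : Claim_changed_solution := by
  unfold Claim_changed_solution
  exact ⟨by decide, by decide, by decide, solution_deg 0 0 [] (by omega), by decide, by decide⟩

theorem solution_tight : Claim_exact_solution := by
  intro k n reqs _ hpre hD
  obtain ⟨hk, hn⟩ := hD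
  subst hk
  subst hn
  rw [solution_deg 0 0 reqs (by omega), alt_k_nonpos 0 0 reqs (le_refl 0) (le_refl 0),
    if_pos ⟨rfl, rfl⟩]
  norm_num
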